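-- pv_equiv track=rewrite | github.com/uttamapaksa/algorithm | 프로그래머스/2/250136. ［PCCP 기출문제］ 2번 ／ 석유 시추/［PCCP 기출문제］ 2번 ／ 석유 시추.py | solution
-- ===== SOURCE A (Python) =====
-- d = ((-1, 0), (0, -1), (1, 0), (0, 1))
--
-- def solution(arr):
--     n = len(arr)
--     m = len(arr[0])
--     oil = [0] * (m+1)
--
--     visit = [[0] * m for _ in range(n)]
--     for i in range(n):
--         for j in range(m):
--             if not arr[i][j] or visit[i][j]: continue
--
--             S = [(i, j)]
--             tmp = [(i, j)]
--             tmpm = {j}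
--             visit[i][j] = 1
--
--             while S:
--                 r, c = S.pop()
--                 for dr, dc in d:
--                     nr, nc = r + dr, c + dc
--                     if 0 <= nr < n and 0 <= nc < m and arr[nr][nc] and not visit[nr][nc]:
--                         S.append((nr, nc))
--                         tmp.append((nr, nc))
--                         tmpm.add(nc)
--                         visit[nr][nc] = 1
--
--             cnt = len(tmp)
--             for r, c in tmp:
--                 visit[r][c] = cnt
--             for c in tmpm:
--                 oil[c] += cnt
--
--     return max(oil)
-- ===== SOURCE B (Python) =====
-- def solution(arr):
--     n, m = len(arr), len(arr[0])
--
--     def union(comp, a, b):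
--         ca, cb = comp[a], comp[b]
--         if ca == cb:
--             return comp
--         return [cb if v == ca else v for v in comp]
--
--     comp = [i * m + j for i in range(n) for j in range(m)]
--     for i in range(n):
--         for j in range(m):
--             if arr[i][j]:
--                 if j + 1 < m and arr[i][j + 1]:
--                     comp = union(comp, i * m + j, i * m + j + 1)
--                 if i + 1 < n and arr[i + 1][j]:
--                     comp = union(comp, i * m + j, (i + 1) * m + j)
--
--     size = {}
--     for i in range(n):
--         for j in range(m):
--             if arr[i][j]:
--                 size[comp[i * m + j]] = size.get(comp[i * m + j], 0) + 1
--
--     oil = [0] * (m + 1)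
--     seen = set()
--     for i in range(n):
--         for j in range(m):
--             if arr[i][j] and (comp[i * m + j], j) not in seen:
--                 seen.add((comp[i * m + j], j))
--                 oil[j] += size[comp[i * m + j]]
--     return max(oil)
-- ===== Notes on version B (the rewrite author's own statement) =====
-- stated objective: alternative
-- what changed: Replaces the per-component flood fill (DFS stack + visit matrix + per-component oil updates) by a quick-find union-find over cell indices i*m+j: each oil cell is unioned with its right and down oil neighbours by relabelling the component array, then component sizes are counted into a dict keyed by root and each distinct (root, column) pair adds its component's size to that column's total.
import Mathlib
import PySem

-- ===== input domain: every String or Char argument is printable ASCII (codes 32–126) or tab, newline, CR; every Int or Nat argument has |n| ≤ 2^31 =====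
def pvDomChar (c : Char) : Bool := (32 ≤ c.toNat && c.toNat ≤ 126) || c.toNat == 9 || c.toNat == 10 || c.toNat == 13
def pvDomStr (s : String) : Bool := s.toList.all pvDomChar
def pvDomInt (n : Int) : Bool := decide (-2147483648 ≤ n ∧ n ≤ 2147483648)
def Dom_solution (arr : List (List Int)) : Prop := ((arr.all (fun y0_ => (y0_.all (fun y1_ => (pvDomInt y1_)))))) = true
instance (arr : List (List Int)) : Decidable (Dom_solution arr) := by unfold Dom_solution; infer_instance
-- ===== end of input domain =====

-- B replaces A's flood fill by a quick-find union-find over cell indices i*m+j (right/down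
-- unions by relabelling the component array), then counts component sizes into a dict and adds
-- each component's size once per distinct (root, column) pair; equal return value on Pre_.

-- ===== PORT A =====
-- shared cell read: arr[r][c] for 0 ≤ r < len(arr), 0 ≤ c ≤ len-of-that-row (exact there; the
-- out-of-range default 0 is never reached on inputs satisfying Pre_solution)
def pvGetCell (arr : List (List Int)) (r c : Int) : Int :=
  ((PySem.List.pyGet? ((PySem.List.pyGet? arr r).getD []) c)).getD 0

-- shared oil[c] += v (exact for 0 ≤ c < len(oil), the only use)
def pvOilAdd (oil : List Int) (c v : Int) : List Int :=
  oil.set c.toNat (oil.getD c.toNat 0 + v)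

-- the module constant d
def pvD : List (Int × Int) := [(-1, 0), (0, -1), (1, 0), (0, 1)]

-- visit[r][c]; the out-of-range default 1 ("already visited") is never reached on real states
-- (all reads are guarded by 0 ≤ r < n, 0 ≤ c < m) and makes termination provable
def pvVGet (visit : List (List Int)) (r c : Int) : Int :=
  ((PySem.List.pyGet? ((PySem.List.pyGet? visit r).getD []) c)).getD 1

-- visit[r][c] = v (exact for the in-range indices it is used at)
def pvVSet (visit : List (List Int)) (r c v : Int) : List (List Int) :=
  visit.set r.toNat ((visit.getD r.toNat []).set c.toNat v)

-- number of 0 entries of visit (termination measure only)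
def pvZeros (visit : List (List Int)) : Nat :=
  (visit.map (fun row => row.countP (fun v => v == 0))).sum


lemma pvVGet_zero_elim (visit : List (List Int)) (nr nc : Int) (h0r : 0 ≤ nr) (h0c : 0 ≤ nc)
    (hz : pvVGet visit nr nc = 0) :
    ∃ (hr : nr.toNat < visit.length), ∃ (hc : nc.toNat < (visit[nr.toNat]).length),
      visit[nr.toNat][nc.toNat] = 0 := by
  unfold pvVGet at hz
  cases hrow : PySem.List.pyGet? visit nr with
  | none => rw [hrow] at hz; simp [PySem.List.pyGet?] at hz
  | some row =>
      rw [hrow] at hz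
      simp only [Option.getD_some] at hz
      cases hcell : PySem.List.pyGet? row nc with
      | none => rw [hcell] at hz; simp at hz
      | some v =>
          rw [hcell] at hz
          simp only [Option.getD_some] at hz
          subst hz
          rw [PySem.List.pyGet?_of_nonneg (h := h0r)] at hrow
          rw [PySem.List.pyGet?_of_nonneg (h := h0c)] at hcell
          have hr : nr.toNat < visit.length := by
            by_contra hcon
            rw [List.getElem?_eq_none (by omega)] at hrow; simp at hrow
          have hrow' : visit[nr.toNat] = row := by
            rw [List.getElem?_eq_getElem hr] at hrow; exact Option.some.inj hrow
          have hc : nc.toNat < row.length := by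
            by_contra hcon
            rw [List.getElem?_eq_none (by omega)] at hcell; simp at hcell
          rw [List.getElem?_eq_getElem hc] at hcell
          exact ⟨hr, by rw [hrow']; exact ⟨hc, Option.some.inj hcell⟩⟩

lemma pv_sum_set (l : List Nat) (i : Nat) (x : Nat) (h : i < l.length) :
    (l.set i x).sum + l[i] = l.sum + x := by
  induction l generalizing i with
  | nil => simp at h
  | cons a t ih =>
      cases i with
      | zero => simp [List.set]; omega
      | succ n =>
          simp only [List.set, List.sum_cons, List.getElem_cons_succ]
          have := ih n (by simpa using h)
          omega

lemma pv_countP_set_zero (row : List Int) (c : Nat) (h : c < row.length) (h0 : row[c] = 0) :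
    (row.set c (1:Int)).countP (fun v => v == 0) + 1 = row.countP (fun v => v == 0) := by
  induction row generalizing c with
  | nil => simp at h
  | cons a t ih =>
      cases c with
      | zero => simp_all
      | succ n =>
          simp only [List.set, List.countP_cons]
          have := ih n (by simpa using h) (by simpa using h0)
          omega

lemma pvZeros_vset (visit : List (List Int)) (nr nc : Int) (h0r : 0 ≤ nr) (h0c : 0 ≤ nc)
    (hz : pvVGet visit nr nc = 0) :
    pvZeros (pvVSet visit nr nc 1) + 1 = pvZeros visit := by
  obtain ⟨hr, hc, h0⟩ := pvVGet_zero_elim visit nr nc h0r h0c hz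
  unfold pvVSet pvZeros
  have hgd : visit.getD nr.toNat [] = visit[nr.toNat] := List.getD_eq_getElem _ _ hr
  rw [hgd, List.map_set]
  have hlen : nr.toNat < (visit.map (fun row => row.countP (fun v => v == 0))).length := by
    simpa using hr
  have hsum := pv_sum_set (visit.map (fun row => row.countP (fun v => v == 0))) nr.toNat
      (((visit[nr.toNat]).set nc.toNat 1).countP (fun v => v == 0)) hlen
  have hcnt := pv_countP_set_zero (visit[nr.toNat]) nc.toNat hc h0
  have hget : (visit.map (fun row => row.countP (fun v => v == 0)))[nr.toNat] =
      (visit[nr.toNat]).countP (fun v => v == 0) := by simp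
  omega

-- one neighbour probe of the inner while-loop of A (state: S, tmp, tmpm, visit)
def pvStepA (arr : List (List Int)) (n m : Int) (p : Int × Int)
    (st : List (Int × Int) × List (Int × Int) × PySem.Set Int × List (List Int))
    (d : Int × Int) :
    List (Int × Int) × List (Int × Int) × PySem.Set Int × List (List Int) :=
  let nr := p.1 + d.1
  let nc := p.2 + d.2
  if 0 ≤ nr ∧ nr < n ∧ 0 ≤ nc ∧ nc < m ∧ pvGetCell arr nr nc ≠ 0 ∧ pvVGet st.2.2.2 nr nc = 0 then
    (st.1 ++ [(nr, nc)], st.2.1 ++ [(nr, nc)], PySem.Set.add st.2.2.1 nc, pvVSet st.2.2.2 nr nc 1)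
  else st

lemma pvStepA_measure (arr : List (List Int)) (n m : Int) (p : Int × Int)
    (st : List (Int × Int) × List (Int × Int) × PySem.Set Int × List (List Int))
    (d : Int × Int) :
    2 * pvZeros (pvStepA arr n m p st d).2.2.2 + (pvStepA arr n m p st d).1.length ≤
      2 * pvZeros st.2.2.2 + st.1.length := by
  simp only [pvStepA]
  split_ifs with h
  · obtain ⟨h1, h2, h3, h4, h5, h6⟩ := h
    have := pvZeros_vset st.2.2.2 _ _ h1 h3 h6
    simp only [List.length_append, List.length_cons, List.length_nil]
    omega
  · exact le_refl _

lemma pvFoldA_measure (arr : List (List Int)) (n m : Int) (p : Int × Int)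
    (ds : List (Int × Int))
    (st : List (Int × Int) × List (Int × Int) × PySem.Set Int × List (List Int)) :
    2 * pvZeros (ds.foldl (pvStepA arr n m p) st).2.2.2 +
        (ds.foldl (pvStepA arr n m p) st).1.length ≤
      2 * pvZeros st.2.2.2 + st.1.length := by
  induction ds generalizing st with
  | nil => simp
  | cons d ds ih => exact le_trans (ih _) (pvStepA_measure arr n m p st d)

-- the inner while-loop of A
def pvLoopA (arr : List (List Int)) (n m : Int)
    (S tmp : List (Int × Int)) (tmpm : PySem.Set Int) (visit : List (List Int)) :
    List (Int × Int) × PySem.Set Int × List (List Int) :=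
  if hS : S = [] then (tmp, tmpm, visit)
  else
    let p := S.getLast hS
    let r := pvD.foldl (pvStepA arr n m p) (S.dropLast, tmp, tmpm, visit)
    pvLoopA arr n m r.1 r.2.1 r.2.2.1 r.2.2.2
termination_by 2 * pvZeros visit + S.length
decreasing_by
  have h := pvFoldA_measure arr n m (S.getLast hS) pvD (S.dropLast, tmp, tmpm, visit)
  have hlen : S.dropLast.length + 1 = S.length := by
    cases S with
    | nil => exact absurd rfl hS
    | cons a t => simp
  dsimp only at h ⊢
  omega

-- the body of the double for-loop of A (state: oil, visit)
def pvCellA (arr : List (List Int)) (n m : Int) (i j : Int)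
    (st : List Int × List (List Int)) : List Int × List (List Int) :=
  if pvGetCell arr i j ≠ 0 ∧ pvVGet st.2 i j = 0 then
    let visit1 := pvVSet st.2 i j 1
    let r := pvLoopA arr n m [(i, j)] [(i, j)] (PySem.Set.ofList [j]) visit1
    let cnt : Int := r.1.length
    let visit3 := r.1.foldl (fun v q => pvVSet v q.1 q.2 cnt) r.2.2
    let oil' := r.2.1.foldl (fun o c => pvOilAdd o c cnt) st.1
    (oil', visit3)
  else st

def solution (arr : List (List Int)) : Int :=
  let n : Int := PySem.List.len arr
  let m : Int := PySem.List.len ((PySem.List.pyGet? arr 0).getD [])  -- arr[0]; IndexError (arr = []) excluded by Pre_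
  let oil0 : List Int := PySem.List.pyRepeat [(0 : Int)] (m + 1)
  let visit0 : List (List Int) := (PySem.List.pyRange 0 n 1).map (fun _ => PySem.List.pyRepeat [(0 : Int)] m)
  let r := (PySem.List.pyRange 0 n 1).foldl
    (fun st i => (PySem.List.pyRange 0 m 1).foldl (fun st j => pvCellA arr n m i j st) st)
    (oil0, visit0)
  (PySem.List.max? r.1 (fun x => x)).getD 0  -- max(oil); oil is nonempty

-- ===== PORT B =====
-- comp[x] for an always in-range x (every read in B is at 0 ≤ x < len(comp))
def pvCf (comp : List Int) (x : Int) : Int :=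
  (PySem.List.pyGet? comp x).getD 0

-- Source B's helper union(comp, a, b): quick-find relabelling of the class of a onto the class of b
def ufUnion (comp : List Int) (a b : Int) : List Int :=
  let ca := pvCf comp a
  let cb := pvCf comp b
  if ca = cb then comp
  else comp.map (fun v => if v = ca then cb else v)

-- body of B's first double loop: union the cell with its right and down oil neighbours
def pvUStep (arr : List (List Int)) (n m : Int) (comp : List Int) (i j : Int) : List Int :=
  if pvGetCell arr i j ≠ 0 then
    let comp1 := if j + 1 < m ∧ pvGetCell arr i (j + 1) ≠ 0 then
        ufUnion comp (i * m + j) (i * m + j + 1) else comp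
    if i + 1 < n ∧ pvGetCell arr (i + 1) j ≠ 0 then
      ufUnion comp1 (i * m + j) ((i + 1) * m + j) else comp1
  else comp

-- body of B's second double loop: size[comp[x]] = size.get(comp[x], 0) + 1 on oil cells
def pvSizeStep (arr : List (List Int)) (m : Int) (comp : List Int)
    (d : PySem.Dict Int Int) (i j : Int) : PySem.Dict Int Int :=
  if pvGetCell arr i j ≠ 0 then
    d.insert (pvCf comp (i * m + j)) (d.getD (pvCf comp (i * m + j)) 0 + 1)
  else d

-- body of B's third double loop: add size once per fresh (root, column) pair
def pvAccStep (arr : List (List Int)) (m : Int) (comp : List Int) (size : PySem.Dict Int Int)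
    (st : List Int × PySem.Set (Int × Int)) (i j : Int) : List Int × PySem.Set (Int × Int) :=
  if pvGetCell arr i j ≠ 0 ∧ ¬ (pvCf comp (i * m + j), j) ∈ st.2 then
    (pvOilAdd st.1 j (size.getD (pvCf comp (i * m + j)) 0),
     PySem.Set.add st.2 (pvCf comp (i * m + j), j))
  else st

def solution_alt (arr : List (List Int)) : Int :=
  let n : Int := PySem.List.len arr
  let m : Int := PySem.List.len ((PySem.List.pyGet? arr 0).getD [])  -- arr[0]; IndexError (arr = []) excluded by Pre_
  let comp0 : List Int :=
    (PySem.List.pyRange 0 n 1).flatMap (fun i => (PySem.List.pyRange 0 m 1).map (fun j => i * m + j))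
  let comp : List Int := (PySem.List.pyRange 0 n 1).foldl (fun comp i =>
      (PySem.List.pyRange 0 m 1).foldl (fun comp j => pvUStep arr n m comp i j) comp) comp0
  let size : PySem.Dict Int Int := (PySem.List.pyRange 0 n 1).foldl (fun d i =>
      (PySem.List.pyRange 0 m 1).foldl (fun d j => pvSizeStep arr m comp d i j) d) PySem.Dict.empty
  let st := (PySem.List.pyRange 0 n 1).foldl (fun st i =>
      (PySem.List.pyRange 0 m 1).foldl (fun st j => pvAccStep arr m comp size st i j) st)
    (PySem.List.pyRepeat [(0 : Int)] (m + 1), (PySem.Set.empty : PySem.Set (Int × Int)))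
  (PySem.List.max? st.1 (fun x => x)).getD 0

-- ===== PRECONDITION & SPEC =====
-- Pre_ excludes exactly the inputs on which A raises IndexError: the empty list (arr[0]) and
-- arrays in which some row is shorter than the first row (arr[i][j] for j < len(arr[0])).
def Pre_solution (arr : List (List Int)) : Prop :=
  arr ≠ [] ∧ ∀ row ∈ arr, (arr.headI).length ≤ row.length
instance (arr : List (List Int)) : Decidable (Pre_solution arr) := by
  unfold Pre_solution; infer_instance

def pvWitness_solution : List (List Int) := [[1, 0], [0, 1]]

def Spec_solution (arr : List (List Int)) (out : Int) : Prop := out = solution_alt arr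
instance (arr : List (List Int)) (out : Int) : Decidable (Spec_solution arr out) := by
  unfold Spec_solution; infer_instance

-- ===== CLAIM (what is proved, stated in full; the proofs are below) =====
def Claim_equal_solution : Prop :=
  ∀ (arr : List (List Int)), Dom_solution arr → Pre_solution arr → Spec_solution arr (solution arr)

-- ===== LEMMAS AND PROOFS =====

-- The proof goes through a middle layer pvMidSol (a BFS flood fill collecting per-component
-- (size, column-set) pairs): solution = pvMidSol (flood-fill vs flood-fill, proved by a step
-- relation) and pvMidSol = solution_alt (flood-fill components vs union-find classes).

-- the four neighbour cells ((r-1,c), (r,c-1), (r+1,c), (r,c+1))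
def pvNbrs (p : Int × Int) : List (Int × Int) :=
  [(p.1 - 1, p.2), (p.1, p.2 - 1), (p.1 + 1, p.2), (p.1, p.2 + 1)]

-- all grid cells
def pvCells (n m : Int) : List (Int × Int) :=
  (PySem.List.pyRange 0 n 1) ×ˢ (PySem.List.pyRange 0 m 1)

-- number of grid cells not yet seen (termination measure only)
def pvFree (n m : Int) (seen : PySem.Set (Int × Int)) : Nat :=
  (pvCells n m).countP (fun q => !(q ∈ seen : Bool))


lemma pv_countP_strict {α : Type} (l : List α) (p q : α → Bool)
    (h : ∀ x ∈ l, q x = true → p x = true) (x₀ : α) (hx : x₀ ∈ l)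
    (hp : p x₀ = true) (hq : ¬ q x₀ = true) : l.countP q < l.countP p := by
  induction l with
  | nil => simp at hx
  | cons a t ih =>
      simp only [List.countP_cons]
      rcases List.mem_cons.1 hx with rfl | hx'
      · have := List.countP_mono_left (l := t) (p := q) (q := p)
          (fun x hx => h x (List.mem_cons_of_mem _ hx))
        simp [hp, hq]; omega
      · by_cases hqa : q a = true
        · have hpa := h a (List.mem_cons_self) hqa
          have := ih (fun x hx => h x (List.mem_cons_of_mem _ hx)) hx'
          simp [hpa, hqa]; omega
        · have := ih (fun x hx => h x (List.mem_cons_of_mem _ hx)) hx'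
          split_ifs <;> omega

lemma pvFree_add (n m : Int) (seen : PySem.Set (Int × Int)) (q : Int × Int)
    (hq : ¬ q ∈ seen) (h1 : 0 ≤ q.1) (h2 : q.1 < n) (h3 : 0 ≤ q.2) (h4 : q.2 < m) :
    pvFree n m (PySem.Set.add seen q) + 1 ≤ pvFree n m seen := by
  rw [PySem.Set.add_of_not_mem hq]
  have hmem : q ∈ pvCells n m := by
    unfold pvCells
    simp only [SProd.sprod, List.product, List.mem_flatMap, List.mem_map]
    refine ⟨q.1, ?_, q.2, ?_, rfl⟩ <;> rw [PySem.List.mem_pyRange_one] <;> omega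
  have := pv_countP_strict (pvCells n m)
      (fun x => !(x ∈ seen : Bool)) (fun x => !(x ∈ seen ++ [q] : Bool))
      (by intro x hx hmem'; simp at hmem' ⊢; exact hmem'.1) q hmem
      (by simpa using hq) (by simp)
  unfold pvFree
  omega

-- one neighbour probe of the BFS loop of pvMidSol (state: queue, seen)
def pvStepB (arr : List (List Int)) (n m : Int)
    (st : List (Int × Int) × PySem.Set (Int × Int)) (q : Int × Int) :
    List (Int × Int) × PySem.Set (Int × Int) :=
  if 0 ≤ q.1 ∧ q.1 < n ∧ 0 ≤ q.2 ∧ q.2 < m ∧ pvGetCell arr q.1 q.2 ≠ 0 ∧ ¬ q ∈ st.2 then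
    (st.1 ++ [q], PySem.Set.add st.2 q)
  else st

lemma pvStepB_measure (arr : List (List Int)) (n m : Int)
    (st : List (Int × Int) × PySem.Set (Int × Int)) (q : Int × Int) :
    2 * pvFree n m (pvStepB arr n m st q).2 + (pvStepB arr n m st q).1.length ≤
        2 * pvFree n m st.2 + st.1.length ∧
      st.1.length ≤ (pvStepB arr n m st q).1.length := by
  simp only [pvStepB]
  split_ifs with h
  · obtain ⟨h1, h2, h3, h4, h5, h6⟩ := h
    have := pvFree_add n m st.2 q h6 h1 h2 h3 h4
    simp only [List.length_append, List.length_cons, List.length_nil]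
    omega
  · exact ⟨le_refl _, le_refl _⟩

lemma pvFoldB_measure (arr : List (List Int)) (n m : Int) (ds : List (Int × Int))
    (st : List (Int × Int) × PySem.Set (Int × Int)) :
    2 * pvFree n m (ds.foldl (pvStepB arr n m) st).2 + (ds.foldl (pvStepB arr n m) st).1.length ≤
        2 * pvFree n m st.2 + st.1.length ∧
      st.1.length ≤ (ds.foldl (pvStepB arr n m) st).1.length := by
  induction ds generalizing st with
  | nil => simp
  | cons d ds ih =>
      have h1 := pvStepB_measure arr n m st d
      have h2 := ih (pvStepB arr n m st d)
      simp only [List.foldl_cons]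
      omega

-- the BFS while-loop of pvMidSol (head-indexed queue)
def pvLoopB (arr : List (List Int)) (n m : Int)
    (queue : List (Int × Int)) (head : Nat) (cols : PySem.Set Int)
    (seen : PySem.Set (Int × Int)) :
    List (Int × Int) × PySem.Set Int × PySem.Set (Int × Int) :=
  if h : head < queue.length then
    let p := queue[head]
    let r := (pvNbrs p).foldl (pvStepB arr n m) (queue, seen)
    pvLoopB arr n m r.1 (head + 1) (PySem.Set.add cols p.2) r.2
  else (queue, cols, seen)
termination_by 2 * pvFree n m seen + (queue.length - head)
decreasing_by
  have h2 := pvFoldB_measure arr n m (pvNbrs (queue[head])) (queue, seen)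
  dsimp only at h2 ⊢
  omega

-- the body of the double for-loop of pvMidSol (state: comps, seen)
def pvCellB (arr : List (List Int)) (n m : Int) (si sj : Int)
    (st : List (Int × PySem.Set Int) × PySem.Set (Int × Int)) :
    List (Int × PySem.Set Int) × PySem.Set (Int × Int) :=
  if pvGetCell arr si sj ≠ 0 ∧ ¬ (si, sj) ∈ st.2 then
    let seen1 := PySem.Set.add st.2 (si, sj)
    let r := pvLoopB arr n m [(si, sj)] 0 PySem.Set.empty seen1
    (st.1 ++ [((r.1.length : Int), r.2.1)], r.2.2)
  else st

-- the middle layer: flood fill collecting (component size, column set) pairs, then aggregating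
def pvMidSol (arr : List (List Int)) : Int :=
  let n : Int := PySem.List.len arr
  let m : Int := PySem.List.len ((PySem.List.pyGet? arr 0).getD [])
  let r := (PySem.List.pyRange 0 n 1).foldl
    (fun st si => (PySem.List.pyRange 0 m 1).foldl (fun st sj => pvCellB arr n m si sj st) st)
    ([], PySem.Set.empty)
  let oil0 : List Int := PySem.List.pyRepeat [(0 : Int)] (m + 1)
  let oil := r.1.foldl (fun o sc => sc.2.foldl (fun o c => pvOilAdd o c sc.1) o) oil0
  (PySem.List.max? oil (fun x => x)).getD 0

-- proof-side abstractions
def pvOkB (n m : Int) (p : Int × Int) : Prop := 0 ≤ p.1 ∧ p.1 < n ∧ 0 ≤ p.2 ∧ p.2 < m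
def pvOk (arr : List (List Int)) (n m : Int) (p : Int × Int) : Prop :=
  pvOkB n m p ∧ pvGetCell arr p.1 p.2 ≠ 0
def pvAdj (p q : Int × Int) : Prop := ∃ d ∈ pvD, q = (p.1 + d.1, p.2 + d.2)
def pvStepRel (arr : List (List Int)) (n m : Int) (p q : Int × Int) : Prop :=
  pvOk arr n m q ∧ pvAdj p q
def pvReach (arr : List (List Int)) (n m : Int) (p q : Int × Int) : Prop :=
  Relation.ReflTransGen (pvStepRel arr n m) p q
def pvGOOD (n m : Int) (visit : List (List Int)) : Prop :=
  visit.length = n.toNat ∧ ∀ row ∈ visit, row.length = m.toNat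
def pvVp (visit : List (List Int)) (p : Int × Int) : Prop := pvVGet visit p.1 p.2 ≠ 0

lemma pvVGet_good (n m : Int) (visit : List (List Int)) (p : Int × Int)
    (hG : pvGOOD n m visit) (hp : pvOkB n m p) :
    ∃ (hr : p.1.toNat < visit.length) (hc : p.2.toNat < (visit[p.1.toNat]).length),
      pvVGet visit p.1 p.2 = visit[p.1.toNat][p.2.toNat] := by
  obtain ⟨hp1, hp2, hp3, hp4⟩ := hp
  obtain ⟨hlen, hrows⟩ := hG
  have hr : p.1.toNat < visit.length := by omega
  have hc : p.2.toNat < (visit[p.1.toNat]).length := by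
    rw [hrows _ (List.getElem_mem hr)]; omega
  refine ⟨hr, hc, ?_⟩
  unfold pvVGet
  rw [PySem.List.pyGet?_of_nonneg (h := hp1), List.getElem?_eq_getElem hr,
    Option.getD_some, PySem.List.pyGet?_of_nonneg (h := hp3), List.getElem?_eq_getElem hc,
    Option.getD_some]

lemma pvGOOD_vset (n m : Int) (visit : List (List Int)) (p : Int × Int) (v : Int)
    (hG : pvGOOD n m visit) :
    pvGOOD n m (pvVSet visit p.1 p.2 v) := by
  obtain ⟨hlen, hrows⟩ := hG
  unfold pvVSet
  by_cases hr : p.1.toNat < visit.length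
  · refine ⟨by simp [hlen], ?_⟩
    intro row hrow
    rcases List.mem_or_eq_of_mem_set hrow with h | h
    · exact hrows _ h
    · subst h
      rw [List.length_set, List.getD_eq_getElem _ _ hr]
      exact hrows _ (List.getElem_mem hr)
  · rw [List.set_eq_of_length_le (by omega)]
    exact ⟨hlen, hrows⟩

lemma pvVGet_nonneg (visit : List (List Int)) (r c : Int) (h0r : 0 ≤ r) (h0c : 0 ≤ c) :
    pvVGet visit r c = (((visit[r.toNat]?).getD [])[c.toNat]?).getD 1 := by
  unfold pvVGet
  rw [PySem.List.pyGet?_of_nonneg (h := h0r), PySem.List.pyGet?_of_nonneg (h := h0c)]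

lemma pvVGet_vset (n m : Int) (visit : List (List Int)) (p q : Int × Int) (v : Int)
    (hG : pvGOOD n m visit) (hp : pvOkB n m p) (hq : pvOkB n m q) :
    pvVGet (pvVSet visit p.1 p.2 v) q.1 q.2 = if q = p then v else pvVGet visit q.1 q.2 := by
  obtain ⟨a1, a2, a3, a4⟩ := hp
  obtain ⟨b1, b2, b3, b4⟩ := hq
  obtain ⟨hlen, hrows⟩ := hG
  have hr : p.1.toNat < visit.length := by omega
  have hc : p.2.toNat < (visit[p.1.toNat]).length := by
    rw [hrows _ (List.getElem_mem hr)]; omega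
  have hqp : q = p ↔ (p.1.toNat = q.1.toNat ∧ p.2.toNat = q.2.toNat) := by
    constructor
    · rintro rfl; exact ⟨rfl, rfl⟩
    · rintro ⟨h1, h2⟩; exact Prod.ext (by omega) (by omega)
  rw [pvVGet_nonneg _ _ _ b1 b3, pvVGet_nonneg _ _ _ b1 b3]
  unfold pvVSet
  have hgd : visit.getD p.1.toNat [] = visit[p.1.toNat] := List.getD_eq_getElem _ _ hr
  rw [hgd, List.getElem?_set]
  by_cases h1 : p.1.toNat = q.1.toNat
  · simp only [h1, if_pos (h1 ▸ hr), if_true, Option.getD_some]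
    rw [List.getElem?_set]
    by_cases h2 : p.2.toNat = q.2.toNat
    · have hqp' : q = p := hqp.2 ⟨h1, h2⟩
      rw [← h2, ← h1] at *
      simp [hqp', hc]
    · have hqp' : ¬ q = p := fun hc0 => h2 (hqp.1 hc0).2
      simp [h2, hqp', List.getElem?_eq_getElem (h1 ▸ hr)]
  · have hqp' : ¬ q = p := fun hc0 => h1 (hqp.1 hc0).1
    simp [h1, hqp']

lemma pvVp_mark (n m : Int) (visit : List (List Int)) (t q : Int × Int)
    (hG : pvGOOD n m visit) (ht : pvOkB n m t) (hq : pvOkB n m q) :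
    pvVp (pvVSet visit t.1 t.2 1) q ↔ pvVp visit q ∨ q = t := by
  unfold pvVp
  rw [pvVGet_vset n m visit t q 1 hG ht hq]
  by_cases h : q = t <;> simp [h]

lemma pvNotVp (visit : List (List Int)) (p : Int × Int) :
    ¬ pvVp visit p ↔ pvVGet visit p.1 p.2 = 0 := by
  unfold pvVp; tauto

lemma pvFoldA_char (arr : List (List Int)) (n m : Int) (x : Int × Int) (ds : List (Int × Int))
    (S tmp : List (Int × Int)) (tmpm : PySem.Set Int) (visit : List (List Int))
    (hG : pvGOOD n m visit) :
    ∃ π : List (Int × Int),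
      (ds.foldl (pvStepA arr n m x) (S, tmp, tmpm, visit)).1 = S ++ π ∧
      (ds.foldl (pvStepA arr n m x) (S, tmp, tmpm, visit)).2.1 = tmp ++ π ∧
      (∀ c, c ∈ (ds.foldl (pvStepA arr n m x) (S, tmp, tmpm, visit)).2.2.1 ↔
        c ∈ tmpm ∨ c ∈ π.map Prod.snd) ∧
      (tmpm.Nodup → (ds.foldl (pvStepA arr n m x) (S, tmp, tmpm, visit)).2.2.1.Nodup) ∧
      pvGOOD n m (ds.foldl (pvStepA arr n m x) (S, tmp, tmpm, visit)).2.2.2 ∧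
      (∀ q ∈ π, pvOk arr n m q ∧ ¬ pvVp visit q ∧ ∃ d ∈ ds, q = (x.1 + d.1, x.2 + d.2)) ∧
      π.Nodup ∧
      (∀ q, pvOkB n m q →
        (pvVp (ds.foldl (pvStepA arr n m x) (S, tmp, tmpm, visit)).2.2.2 q ↔
          pvVp visit q ∨ q ∈ π)) ∧
      (∀ d ∈ ds, pvOk arr n m (x.1 + d.1, x.2 + d.2) →
        pvVp (ds.foldl (pvStepA arr n m x) (S, tmp, tmpm, visit)).2.2.2 (x.1 + d.1, x.2 + d.2)) := by
  induction ds generalizing S tmp tmpm visit with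
  | nil =>
      refine ⟨[], by simp, by simp, by simp, by simp, by simpa using hG, by simp, by simp,
        fun q _ => by simp, by simp⟩
  | cons d ds ih =>
      simp only [List.foldl_cons]
      by_cases h : 0 ≤ x.1 + d.1 ∧ x.1 + d.1 < n ∧ 0 ≤ x.2 + d.2 ∧ x.2 + d.2 < m ∧
          pvGetCell arr (x.1 + d.1) (x.2 + d.2) ≠ 0 ∧ pvVGet visit (x.1 + d.1) (x.2 + d.2) = 0
      · -- the neighbour is pushed and marked
        have hstep : pvStepA arr n m x (S, tmp, tmpm, visit) d =
            (S ++ [(x.1 + d.1, x.2 + d.2)], tmp ++ [(x.1 + d.1, x.2 + d.2)],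
              PySem.Set.add tmpm (x.2 + d.2), pvVSet visit (x.1 + d.1) (x.2 + d.2) 1) := by
          simp only [pvStepA]; rw [if_pos h]
        obtain ⟨h1, h2, h3, h4, h5, h6⟩ := h
        set q₀ : Int × Int := (x.1 + d.1, x.2 + d.2) with hq₀
        have hq₀B : pvOkB n m q₀ := ⟨h1, h2, h3, h4⟩
        have hq₀Ok : pvOk arr n m q₀ := ⟨hq₀B, h5⟩
        have hG1 : pvGOOD n m (pvVSet visit q₀.1 q₀.2 1) := pvGOOD_vset n m visit q₀ 1 hG
        obtain ⟨π', e1, e2, e3, e4, e5, e6, e7, e8, e9⟩ :=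
          ih (S ++ [q₀]) (tmp ++ [q₀]) (PySem.Set.add tmpm q₀.2) (pvVSet visit q₀.1 q₀.2 1) hG1
        rw [hstep]
        have hmark : ∀ q, pvOkB n m q →
            (pvVp (pvVSet visit q₀.1 q₀.2 1) q ↔ pvVp visit q ∨ q = q₀) :=
          fun q hq => pvVp_mark n m visit q₀ q hG hq₀B hq
        have hmarked : pvVp (pvVSet visit q₀.1 q₀.2 1) q₀ := (hmark q₀ hq₀B).2 (Or.inr rfl)
        refine ⟨q₀ :: π', ?_, ?_, ?_, ?_, e5, ?_, ?_, ?_, ?_⟩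
        · rw [e1, List.append_assoc]; rfl
        · rw [e2, List.append_assoc]; rfl
        · intro c
          rw [e3 c, PySem.Set.mem_add]
          simp only [List.map_cons, List.mem_cons]
          tauto
        · intro hnd; exact e4 (PySem.Set.nodup_add _ _ hnd)
        · intro q hqmem
          rcases List.mem_cons.1 hqmem with rfl | hq'
          · exact ⟨hq₀Ok, (pvNotVp visit q₀).2 h6, d, List.mem_cons_self, rfl⟩
          · obtain ⟨ho, hnv, dd, hdd, hqd⟩ := e6 q hq'
            refine ⟨ho, ?_, dd, List.mem_cons_of_mem _ hdd, hqd⟩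
            intro hv
            exact hnv ((hmark q ho.1).2 (Or.inl hv))
        · refine List.nodup_cons.2 ⟨?_, e7⟩
          intro hq₀mem
          exact (e6 q₀ hq₀mem).2.1 hmarked
        · intro q hqB
          rw [e8 q hqB, hmark q hqB]
          simp only [List.mem_cons]
          tauto
        · intro dd hdd hok
          rcases List.mem_cons.1 hdd with rfl | hdd'
          · exact ((e8 q₀ hq₀B).2 (Or.inl hmarked))
          · exact e9 dd hdd' hok
      · -- nothing happens for this neighbour
        have hstep : pvStepA arr n m x (S, tmp, tmpm, visit) d = (S, tmp, tmpm, visit) := by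
          simp only [pvStepA]; rw [if_neg h]
        obtain ⟨π, e1, e2, e3, e4, e5, e6, e7, e8, e9⟩ := ih S tmp tmpm visit hG
        rw [hstep]
        refine ⟨π, e1, e2, e3, e4, e5, ?_, e7, e8, ?_⟩
        · intro q hq
          obtain ⟨ho, hnv, dd, hdd, hqd⟩ := e6 q hq
          exact ⟨ho, hnv, dd, List.mem_cons_of_mem _ hdd, hqd⟩
        · intro dd hdd hok
          rcases List.mem_cons.1 hdd with rfl | hdd'
          · -- the failing conjunct must be "already visited"
            have hv : pvVp visit (x.1 + dd.1, x.2 + dd.2) := by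
              obtain ⟨⟨k1, k2, k3, k4⟩, k5⟩ := hok
              by_contra hnv
              exact h ⟨k1, k2, k3, k4, k5, (pvNotVp visit _).1 hnv⟩
            exact (e8 _ hok.1).2 (Or.inl hv)
          · exact e9 dd hdd' hok

lemma pvLoopA_char (arr : List (List Int)) (n m : Int) :
    ∀ (S tmp : List (Int × Int)) (tmpm : PySem.Set Int) (visit : List (List Int)),
    pvGOOD n m visit →
    (∀ p ∈ S, pvOk arr n m p ∧ pvVp visit p) →
    (∀ p ∈ tmp, pvOkB n m p ∧ pvVp visit p) →
    tmp.Nodup →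
    (∀ p, pvOkB n m p → pvVp visit p → p ∉ S →
      ∀ q, pvStepRel arr n m p q → pvVp visit q) →
    pvGOOD n m (pvLoopA arr n m S tmp tmpm visit).2.2 ∧
    (∀ q, pvOkB n m q → pvVp visit q → pvVp (pvLoopA arr n m S tmp tmpm visit).2.2 q) ∧
    (∀ q, pvOkB n m q → pvVp (pvLoopA arr n m S tmp tmpm visit).2.2 q →
      pvVp visit q ∨ ∃ p ∈ S, pvReach arr n m p q) ∧
    (∀ p, pvOkB n m p → pvVp (pvLoopA arr n m S tmp tmpm visit).2.2 p →
      ∀ q, pvStepRel arr n m p q → pvVp (pvLoopA arr n m S tmp tmpm visit).2.2 q) ∧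
    (∃ δ : List (Int × Int),
      (pvLoopA arr n m S tmp tmpm visit).1 = tmp ++ δ ∧
      (∀ q ∈ δ, pvOk arr n m q ∧ ¬ pvVp visit q) ∧
      (tmp ++ δ).Nodup ∧
      (∀ q, pvOkB n m q →
        (pvVp (pvLoopA arr n m S tmp tmpm visit).2.2 q ↔ pvVp visit q ∨ q ∈ δ)) ∧
      (∀ c, c ∈ (pvLoopA arr n m S tmp tmpm visit).2.1 ↔ c ∈ tmpm ∨ c ∈ δ.map Prod.snd) ∧
      (tmpm.Nodup → (pvLoopA arr n m S tmp tmpm visit).2.1.Nodup)) := by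
  intro S tmp tmpm visit
  induction S, tmp, tmpm, visit using pvLoopA.induct (arr := arr) (n := n) (m := m) with
  | case1 tmp tmpm visit =>
      intro hG _ hT hTn hCl
      rw [pvLoopA]
      simp only [dif_pos rfl]
      refine ⟨hG, fun q _ hv => hv, fun q _ hv => Or.inl hv, ?_, [], by simp, by simp,
        by simpa using hTn, fun q _ => by simp, fun c => by simp, fun h => h⟩
      intro p hpB hpv q hstep
      exact hCl p hpB hpv (by simp) q hstep
  | case2 S tmp tmpm visit hS p r ih =>
      intro hG hSinv hT hTn hCl
      rw [pvLoopA]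
      simp only [dif_neg hS]
      -- p = S.getLast hS ; r = foldl over pvD
      obtain ⟨π, e1, e2, e3, e4, e5, e6, e7, e8, e9⟩ :=
        pvFoldA_char arr n m p pvD S.dropLast tmp tmpm visit hG
      have hSdecomp : S = S.dropLast ++ [p] := (List.dropLast_append_getLast hS).symm
      have hpS : p ∈ S := List.getLast_mem hS
      have hpOk : pvOk arr n m p := (hSinv p hpS).1
      have hpV : pvVp visit p := (hSinv p hpS).2
      -- properties of the fold result r
      have hr1 : r.1 = S.dropLast ++ π := e1
      have hr2 : r.2.1 = tmp ++ π := e2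
      have hrG : pvGOOD n m r.2.2.2 := e5
      have hmono : ∀ q, pvOkB n m q → pvVp visit q → pvVp r.2.2.2 q :=
        fun q hqB hv => (e8 q hqB).2 (Or.inl hv)
      -- invariants for the recursive call
      have hSinv' : ∀ q ∈ r.1, pvOk arr n m q ∧ pvVp r.2.2.2 q := by
        intro q hq
        rw [hr1] at hq
        rcases List.mem_append.1 hq with hq | hq
        · have hqS : q ∈ S := by rw [hSdecomp]; exact List.mem_append_left _ hq
          have := hSinv q hqS
          exact ⟨this.1, hmono q this.1.1 this.2⟩
        · have := e6 q hq
          exact ⟨this.1, (e8 q this.1.1).2 (Or.inr hq)⟩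
      have hT' : ∀ q ∈ r.2.1, pvOkB n m q ∧ pvVp r.2.2.2 q := by
        intro q hq
        rw [hr2] at hq
        rcases List.mem_append.1 hq with hq | hq
        · have := hT q hq
          exact ⟨this.1, hmono q this.1 this.2⟩
        · have := e6 q hq
          exact ⟨this.1.1, (e8 q this.1.1).2 (Or.inr hq)⟩
      have hTn' : r.2.1.Nodup := by
        rw [hr2]
        refine List.nodup_append.2 ⟨hTn, e7, ?_⟩
        intro a ha b hb
        intro hab
        subst hab
        exact (e6 a hb).2.1 (hT a ha).2
      have hCl' : ∀ q, pvOkB n m q → pvVp r.2.2.2 q → q ∉ r.1 →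
          ∀ w, pvStepRel arr n m q w → pvVp r.2.2.2 w := by
        intro q hqB hqv hqnot w hstep
        rw [hr1] at hqnot
        by_cases hqvis : pvVp visit q
        · -- q was already visited before this iteration
          by_cases hqp : q = p
          · -- neighbours of the popped cell are covered by the fold
            subst hqp
            obtain ⟨hwOk, dd, hdd, hwd⟩ := hstep
            rw [hwd] at hwOk ⊢
            exact e9 dd hdd hwOk
          · -- q ∉ S, so the old closure applies
            have hqS : q ∉ S := by
              rw [hSdecomp]
              intro hq
              rcases List.mem_append.1 hq with hq | hq
              · exact hqnot (List.mem_append_left _ hq)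
              · rcases List.mem_singleton.1 hq with rfl
                exact hqp rfl
            have := hCl q hqB hqvis hqS w hstep
            exact hmono w hstep.1.1 this
        · -- q was marked by the fold: but then q ∈ π ⊆ r.1, contradiction
          have hqπ : q ∈ π := by
            rcases (e8 q hqB).1 hqv with hv | hv
            · exact absurd hv hqvis
            · exact hv
          exact absurd (List.mem_append_right _ hqπ) hqnot
      obtain ⟨ihG, ihMono, ihC2, ihC4, δ', f1, f2, f3, f4, f5, f6⟩ :=
        ih hrG hSinv' hT' hTn' hCl'
      -- assemble
      refine ⟨ihG, ?_, ?_, ihC4, ?_⟩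
      · intro q hqB hv
        exact ihMono q hqB (hmono q hqB hv)
      · -- C2
        intro q hqB hv
        rcases ihC2 q hqB hv with hv' | ⟨w, hwS, hwreach⟩
        · rcases (e8 q hqB).1 hv' with hv'' | hv''
          · exact Or.inl hv''
          · -- q ∈ π : one step from p
            obtain ⟨hqOk, _, dd, hdd, hqd⟩ := e6 q hv''
            refine Or.inr ⟨p, hpS, Relation.ReflTransGen.single ⟨hqOk, dd, hdd, hqd⟩⟩
        · -- w ∈ r.1 = dropLast ++ π
          rw [hr1] at hwS
          rcases List.mem_append.1 hwS with hw | hw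
          · exact Or.inr ⟨w, by rw [hSdecomp]; exact List.mem_append_left _ hw, hwreach⟩
          · obtain ⟨hwOk, _, dd, hdd, hwd⟩ := e6 w hw
            exact Or.inr ⟨p, hpS,
              Relation.ReflTransGen.trans
                (Relation.ReflTransGen.single ⟨hwOk, dd, hdd, hwd⟩) hwreach⟩
      · -- δ block
        refine ⟨π ++ δ', ?_, ?_, ?_, ?_, ?_, ?_⟩
        · rw [f1, hr2, List.append_assoc]
        · intro q hq
          rcases List.mem_append.1 hq with hq | hq
          · exact ⟨(e6 q hq).1, (e6 q hq).2.1⟩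
          · obtain ⟨hqOk, hnv⟩ := f2 q hq
            refine ⟨hqOk, fun hv => hnv (hmono q hqOk.1 hv)⟩
        · have := f3
          rw [hr2, List.append_assoc] at this
          exact this
        · intro q hqB
          rw [f4 q hqB, e8 q hqB]
          simp only [List.mem_append]
          tauto
        · intro c
          rw [f5 c, e3 c]
          simp only [List.map_append, List.mem_append]
          tauto
        · intro hnd
          exact f6 (e4 hnd)

lemma pvNodupSnoc {α : Type} (l : List α) (x : α) (h : l.Nodup) (hx : x ∉ l) :
    (l ++ [x]).Nodup := by
  rw [List.nodup_append]
  refine ⟨h, List.nodup_singleton x, ?_⟩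
  intro a ha b hb hab
  rw [List.mem_singleton] at hb
  subst hb
  exact hx (hab ▸ ha)

lemma pvAdj_iff_mem_nbrs (p q : Int × Int) : pvAdj p q ↔ q ∈ pvNbrs p := by
  unfold pvAdj pvNbrs pvD
  constructor
  · rintro ⟨d, hd, rfl⟩
    fin_cases hd <;> simp [Prod.ext_iff] <;> omega
  · intro hq
    fin_cases hq
    · exact ⟨(-1, 0), by simp, by simp [Prod.ext_iff] <;> omega⟩
    · exact ⟨(0, -1), by simp, by simp [Prod.ext_iff] <;> omega⟩
    · exact ⟨(1, 0), by simp, by simp [Prod.ext_iff] <;> omega⟩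
    · exact ⟨(0, 1), by simp, by simp [Prod.ext_iff] <;> omega⟩

lemma pvFoldB_char (arr : List (List Int)) (n m : Int) (ds : List (Int × Int))
    (queue : List (Int × Int)) (seen : PySem.Set (Int × Int)) :
    ∃ π : List (Int × Int),
      (ds.foldl (pvStepB arr n m) (queue, seen)).1 = queue ++ π ∧
      (ds.foldl (pvStepB arr n m) (queue, seen)).2 = seen ++ π ∧
      (∀ q ∈ π, pvOk arr n m q ∧ q ∉ seen ∧ q ∈ ds) ∧
      (seen.Nodup → (seen ++ π).Nodup) ∧
      (∀ q ∈ ds, pvOk arr n m q → q ∈ seen ++ π) := by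
  induction ds generalizing queue seen with
  | nil => exact ⟨[], by simp, by simp, by simp, by simpa using fun h => h, by simp⟩
  | cons d ds ih =>
      simp only [List.foldl_cons]
      by_cases h : 0 ≤ d.1 ∧ d.1 < n ∧ 0 ≤ d.2 ∧ d.2 < m ∧ pvGetCell arr d.1 d.2 ≠ 0 ∧
          ¬ d ∈ seen
      · have hstep : pvStepB arr n m (queue, seen) d =
            (queue ++ [d], PySem.Set.add seen d) := by
          simp only [pvStepB]; rw [if_pos h]
        obtain ⟨h1, h2, h3, h4, h5, h6⟩ := h
        have hadd : PySem.Set.add seen d = seen ++ [d] := PySem.Set.add_of_not_mem h6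
        obtain ⟨π', e1, e2, e3, e4, e5⟩ := ih (queue ++ [d]) (PySem.Set.add seen d)
        rw [hstep]
        refine ⟨d :: π', ?_, ?_, ?_, ?_, ?_⟩
        · rw [e1, List.append_assoc]; rfl
        · rw [e2, hadd, List.append_assoc]; rfl
        · intro q hq
          rcases List.mem_cons.1 hq with rfl | hq'
          · exact ⟨⟨⟨h1, h2, h3, h4⟩, h5⟩, h6, List.mem_cons_self⟩
          · obtain ⟨ho, hns, hd⟩ := e3 q hq'
            rw [hadd] at hns
            simp only [List.mem_append, List.mem_singleton] at hns
            exact ⟨ho, fun hc => hns (Or.inl hc), List.mem_cons_of_mem _ hd⟩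
        · intro hnd
          have := e4 (by rw [hadd]; exact pvNodupSnoc seen d hnd h6)
          rw [hadd, List.append_assoc] at this
          exact this
        · intro q hq hok
          rcases List.mem_cons.1 hq with rfl | hq'
          · have : q ∈ PySem.Set.add seen q := by rw [hadd]; simp
            have := e5
            rw [hadd, List.append_assoc] at *
            simp
          · have := e5 q hq' hok
            rw [hadd, List.append_assoc] at this
            simpa using this
      · have hstep : pvStepB arr n m (queue, seen) d = (queue, seen) := by
          simp only [pvStepB]; rw [if_neg h]
        obtain ⟨π, e1, e2, e3, e4, e5⟩ := ih queue seen
        rw [hstep]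
        refine ⟨π, e1, e2, ?_, e4, ?_⟩
        · intro q hq
          obtain ⟨ho, hns, hd⟩ := e3 q hq
          exact ⟨ho, hns, List.mem_cons_of_mem _ hd⟩
        · intro q hq hok
          rcases List.mem_cons.1 hq with rfl | hq'
          · -- the failing conjunct must be "already seen"
            have : q ∈ seen := by
              obtain ⟨⟨k1, k2, k3, k4⟩, k5⟩ := hok
              by_contra hns
              exact h ⟨k1, k2, k3, k4, k5, hns⟩
            exact List.mem_append_left _ this
          · exact e5 q hq' hok

lemma pvLoopB_char (arr : List (List Int)) (n m : Int) :
    ∀ (queue : List (Int × Int)) (head : Nat) (cols : PySem.Set Int)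
      (seen : PySem.Set (Int × Int)),
    (∀ p ∈ queue, pvOk arr n m p ∧ p ∈ seen) →
    seen.Nodup →
    head ≤ queue.length →
    (∀ p ∈ queue.take head, ∀ w, pvStepRel arr n m p w → w ∈ seen) →
    (∀ c, c ∈ cols ↔ ∃ p ∈ queue.take head, p.2 = c) →
    cols.Nodup →
    ∃ δ : List (Int × Int),
      (pvLoopB arr n m queue head cols seen).1 = queue ++ δ ∧
      (pvLoopB arr n m queue head cols seen).2.2 = seen ++ δ ∧
      (∀ q ∈ δ, pvOk arr n m q ∧ q ∉ seen) ∧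
      (seen ++ δ).Nodup ∧
      (∀ q, q ∈ (pvLoopB arr n m queue head cols seen).2.2 →
        q ∈ seen ∨ ∃ p ∈ queue.drop head, pvReach arr n m p q) ∧
      (∀ p ∈ (pvLoopB arr n m queue head cols seen).1, ∀ w, pvStepRel arr n m p w →
        w ∈ (pvLoopB arr n m queue head cols seen).2.2) ∧
      (∀ c, c ∈ (pvLoopB arr n m queue head cols seen).2.1 ↔
        ∃ p ∈ (pvLoopB arr n m queue head cols seen).1, p.2 = c) ∧
      (pvLoopB arr n m queue head cols seen).2.1.Nodup := by
  intro queue head cols seen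
  induction queue, head, cols, seen using pvLoopB.induct (arr := arr) (n := n) (m := m) with
  | case2 queue head cols seen hlt =>
      -- exit: head ≥ queue.length
      intro hQ hSn hhead hClosed hCols hColsN
      rw [pvLoopB]
      simp only [dif_neg hlt]
      have hhead' : head = queue.length := by omega
      have htake : queue.take head = queue := by rw [hhead']; simp
      refine ⟨[], by simp, by simp, by simp, by simpa using hSn, ?_, ?_, ?_, hColsN⟩
      · intro q hq; exact Or.inl hq
      · intro p hp w hw
        exact hClosed p (by rwa [htake]) w hw
      · intro c
        rw [hCols c, htake]
  | case1 queue head cols seen hlt x r ih =>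
      intro hQ hSn hhead hClosed hCols hColsN
      rw [pvLoopB]
      simp only [dif_pos hlt]
      have hx : x = queue[head] := rfl
      obtain ⟨π, e1, e2, e3, e4, e5⟩ := pvFoldB_char arr n m (pvNbrs x) queue seen
      have e1 : r.1 = queue ++ π := e1
      have e2 : r.2 = seen ++ π := e2
      have hxq : x ∈ queue := hx ▸ List.getElem_mem hlt
      have hxOk : pvOk arr n m x := (hQ x hxq).1
      have hxSeen : x ∈ seen := (hQ x hxq).2
      -- invariants for the recursive call
      have hdropq : queue.drop head = x :: queue.drop (head + 1) := by
        rw [List.drop_eq_getElem_cons hlt, hx]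
      have hQ' : ∀ p ∈ r.1, pvOk arr n m p ∧ p ∈ r.2 := by
        intro p hp
        rw [e1] at hp
        rcases List.mem_append.1 hp with hp | hp
        · exact ⟨(hQ p hp).1, by rw [e2]; exact List.mem_append_left _ (hQ p hp).2⟩
        · exact ⟨(e3 p hp).1, by rw [e2]; exact List.mem_append_right _ hp⟩
      have hSn' : r.2.Nodup := by rw [e2]; exact e4 hSn
      have hhead' : head + 1 ≤ r.1.length := by
        rw [e1, List.length_append]; omega
      have htake' : r.1.take (head + 1) = queue.take head ++ [x] := by
        rw [e1, List.take_append_of_le_length (by omega), List.take_succ,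
          List.getElem?_eq_getElem hlt, hx]
        rfl
      have hClosed' : ∀ p ∈ r.1.take (head + 1), ∀ w, pvStepRel arr n m p w → w ∈ r.2 := by
        intro p hp w hw
        rw [htake'] at hp
        rcases List.mem_append.1 hp with hp | hp
        · have := hClosed p hp w hw
          rw [e2]; exact List.mem_append_left _ this
        · rcases List.mem_singleton.1 hp with rfl
          obtain ⟨hwOk, hadj⟩ := hw
          have hwnb : w ∈ pvNbrs x := (pvAdj_iff_mem_nbrs x w).1 hadj
          have := e5 w hwnb hwOk
          rwa [e2]
      have hCols' : ∀ c, c ∈ PySem.Set.add cols x.2 ↔ ∃ p ∈ r.1.take (head + 1), p.2 = c := by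
        intro c
        rw [PySem.Set.mem_add, hCols c, htake']
        constructor
        · rintro (⟨p, hp, rfl⟩ | rfl)
          · exact ⟨p, List.mem_append_left _ hp, rfl⟩
          · exact ⟨x, List.mem_append_right _ (by simp), rfl⟩
        · rintro ⟨p, hp, rfl⟩
          rcases List.mem_append.1 hp with hp | hp
          · exact Or.inl ⟨p, hp, rfl⟩
          · rcases List.mem_singleton.1 hp with rfl
            exact Or.inr rfl
      have hColsN' : (PySem.Set.add cols x.2).Nodup := PySem.Set.nodup_add _ _ hColsN
      obtain ⟨δ', f1, f2, f3, f4, f5, f6, f7, f8⟩ :=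
        ih hQ' hSn' hhead' hClosed' hCols' hColsN'
      refine ⟨π ++ δ', ?_, ?_, ?_, ?_, ?_, f6, f7, f8⟩
      · rw [f1, e1, List.append_assoc]
      · rw [f2, e2, List.append_assoc]
      · intro q hq
        rcases List.mem_append.1 hq with hq | hq
        · exact ⟨(e3 q hq).1, (e3 q hq).2.1⟩
        · obtain ⟨hqOk, hqns⟩ := f3 q hq
          rw [e2] at hqns
          exact ⟨hqOk, fun hc => hqns (List.mem_append_left _ hc)⟩
      · have := f4
        rw [e2, List.append_assoc] at this
        exact this
      · -- C2
        intro q hq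
        rcases f5 q hq with hq' | ⟨p, hp, hreach⟩
        · rw [e2] at hq'
          rcases List.mem_append.1 hq' with hq'' | hq''
          · exact Or.inl hq''
          · -- q ∈ π : single step from x
            obtain ⟨hqOk, _, hqnb⟩ := e3 q hq''
            refine Or.inr ⟨x, by rw [hdropq]; exact List.mem_cons_self, 
              Relation.ReflTransGen.single ⟨hqOk, (pvAdj_iff_mem_nbrs x q).2 hqnb⟩⟩
        · -- p ∈ r.1.drop (head+1)
          have hdrop' : r.1.drop (head + 1) = queue.drop (head + 1) ++ π := by
            rw [e1, List.drop_append_of_le_length (by omega)]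
          rw [hdrop'] at hp
          rcases List.mem_append.1 hp with hp | hp
          · exact Or.inr ⟨p, by rw [hdropq]; exact List.mem_cons_of_mem _ hp, hreach⟩
          · obtain ⟨hpOk, _, hpnb⟩ := e3 p hp
            exact Or.inr ⟨x, by rw [hdropq]; exact List.mem_cons_self,
              Relation.ReflTransGen.trans
                (Relation.ReflTransGen.single ⟨hpOk, (pvAdj_iff_mem_nbrs x p).2 hpnb⟩) hreach⟩

lemma pvOilAdd_comm (o : List Int) (c v c' v' : Int) :
    pvOilAdd (pvOilAdd o c v) c' v' = pvOilAdd (pvOilAdd o c' v') c v := by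
  unfold pvOilAdd
  by_cases h : c.toNat = c'.toNat
  · rw [h]
    by_cases hl : c'.toNat < o.length
    · have hgd : ∀ w : Int, (o.set c'.toNat w).getD c'.toNat 0 = w := by
        intro w
        rw [List.getD_eq_getElem _ _ (by simpa using hl)]
        simp
      rw [hgd, hgd, List.set_set, List.set_set]
      congr 1
      ring
    · have hle : o.length ≤ c'.toNat := by omega
      simp only [List.set_eq_of_length_le hle]
  · have g1 : ∀ (l : List Int) (x : Int), (l.set c.toNat x).getD c'.toNat 0 = l.getD c'.toNat 0 := by
      intro l x
      rw [List.getD_eq_getElem?_getD, List.getD_eq_getElem?_getD, List.getElem?_set_ne h]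
    have g2 : ∀ (l : List Int) (x : Int), (l.set c'.toNat x).getD c.toNat 0 = l.getD c.toNat 0 := by
      intro l x
      rw [List.getD_eq_getElem?_getD, List.getD_eq_getElem?_getD, List.getElem?_set_ne (Ne.symm h)]
    rw [g1, g2, List.set_comm _ _ h]

lemma pvReach_ind (arr : List (List Int)) (n m : Int) (P : (Int × Int) → Prop)
    (seed q : Int × Int) (hseed : P seed) (hseedB : pvOkB n m seed)
    (hstep : ∀ p, pvOkB n m p → P p → ∀ w, pvStepRel arr n m p w → P w)
    (h : pvReach arr n m seed q) : P q := by
  have : P q ∧ pvOkB n m q := by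
    induction h with
    | refl => exact ⟨hseed, hseedB⟩
    | tail hr hs ih => exact ⟨hstep _ ih.2 ih.1 _ hs, hs.1.1⟩
  exact this.1

lemma pvWriteback (n m : Int) (tmp : List (Int × Int)) (cnt : Int) (hcnt : cnt ≠ 0) :
    ∀ (visit : List (List Int)), pvGOOD n m visit → (∀ p ∈ tmp, pvOkB n m p) →
    pvGOOD n m (tmp.foldl (fun v q => pvVSet v q.1 q.2 cnt) visit) ∧
    (∀ q, pvOkB n m q →
      (pvVp (tmp.foldl (fun v q => pvVSet v q.1 q.2 cnt) visit) q ↔ pvVp visit q ∨ q ∈ tmp)) := by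
  induction tmp with
  | nil => intro visit hG _; exact ⟨hG, fun q _ => by simp⟩
  | cons t ts ih =>
      intro visit hG hOk
      have htB : pvOkB n m t := hOk t List.mem_cons_self
      have hG1 : pvGOOD n m (pvVSet visit t.1 t.2 cnt) := pvGOOD_vset n m visit t cnt hG
      obtain ⟨ihG, ihiff⟩ := ih (pvVSet visit t.1 t.2 cnt) hG1
        (fun p hp => hOk p (List.mem_cons_of_mem _ hp))
      refine ⟨ihG, ?_⟩
      intro q hqB
      rw [List.foldl_cons] at *
      rw [ihiff q hqB]
      unfold pvVp
      rw [pvVGet_vset n m visit t q cnt hG htB hqB]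
      by_cases h : q = t <;> simp [h, hcnt]

def pvOilOf (m : Int) (comps : List (Int × PySem.Set Int)) : List Int :=
  comps.foldl (fun o sc => sc.2.foldl (fun o c => pvOilAdd o c sc.1) o)
    (PySem.List.pyRepeat [(0 : Int)] (m + 1))

def pvRel (arr : List (List Int)) (n m : Int) (stA : List Int × List (List Int))
    (stB : List (Int × PySem.Set Int) × PySem.Set (Int × Int)) : Prop :=
  pvGOOD n m stA.2 ∧
  stB.2.Nodup ∧
  (∀ p ∈ stB.2, pvOk arr n m p) ∧
  (∀ q, pvOkB n m q → (pvVp stA.2 q ↔ q ∈ stB.2)) ∧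
  (∀ p ∈ stB.2, ∀ w, pvStepRel arr n m p w → w ∈ stB.2) ∧
  stA.1 = pvOilOf m stB.1

lemma pvCell_rel (arr : List (List Int)) (n m : Int) (i j : Int)
    (hij : pvOkB n m (i, j)) (stA : List Int × List (List Int))
    (stB : List (Int × PySem.Set Int) × PySem.Set (Int × Int))
    (hRel : pvRel arr n m stA stB) :
    pvRel arr n m (pvCellA arr n m i j stA) (pvCellB arr n m i j stB) := by
  obtain ⟨hG, hSn, hSok, hIff, hCl, hOil⟩ := hRel
  have hcond : pvVGet stA.2 i j = 0 ↔ ¬ (i, j) ∈ stB.2 := by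
    rw [← pvNotVp stA.2 (i, j)]
    constructor
    · intro h hc; exact h ((hIff (i, j) hij).2 hc)
    · intro h hc; exact h ((hIff (i, j) hij).1 hc)
  by_cases hA : pvGetCell arr i j ≠ 0 ∧ pvVGet stA.2 i j = 0
  case neg =>
    have hB : ¬ (pvGetCell arr i j ≠ 0 ∧ ¬ (i, j) ∈ stB.2) := by
      intro hc; exact hA ⟨hc.1, hcond.2 hc.2⟩
    simp only [pvCellA, pvCellB]
    rw [if_neg hA, if_neg hB]
    exact ⟨hG, hSn, hSok, hIff, hCl, hOil⟩
  case pos =>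
    have hB : pvGetCell arr i j ≠ 0 ∧ ¬ (i, j) ∈ stB.2 := ⟨hA.1, hcond.1 hA.2⟩
    simp only [pvCellA, pvCellB]
    rw [if_pos hA, if_pos hB]
    set seed : Int × Int := (i, j) with hseed
    have hseedOk : pvOk arr n m seed := ⟨hij, hA.1⟩
    -- A side
    have hG1 : pvGOOD n m (pvVSet stA.2 i j 1) := pvGOOD_vset n m stA.2 seed 1 hG
    have hmark : ∀ q, pvOkB n m q →
        (pvVp (pvVSet stA.2 i j 1) q ↔ pvVp stA.2 q ∨ q = seed) :=
      fun q hq => pvVp_mark n m stA.2 seed q hG hij hq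
    have hVp1seed : pvVp (pvVSet stA.2 i j 1) seed := (hmark seed hij).2 (Or.inr rfl)
    have hVp1_iff : ∀ q, pvOkB n m q →
        (pvVp (pvVSet stA.2 i j 1) q ↔ q ∈ PySem.Set.add stB.2 seed) := by
      intro q hq
      rw [hmark q hq, PySem.Set.mem_add, hIff q hq]
    obtain ⟨ihG, ihMono, ihC2, ihC4, δA, a1, a2, a3, a4, a5, a6⟩ :=
      pvLoopA_char arr n m [seed] [seed] (PySem.Set.ofList [j]) (pvVSet stA.2 i j 1) hG1
        (by intro p hp; rcases List.mem_singleton.1 hp with rfl; exact ⟨hseedOk, hVp1seed⟩)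
        (by intro p hp; rcases List.mem_singleton.1 hp with rfl; exact ⟨hij, hVp1seed⟩)
        (by simp)
        (by
          intro p hpB hpv hpS w hstep
          have hpne : p ≠ seed := by intro h; exact hpS (by simp [h])
          have hpold : pvVp stA.2 p := by
            rcases (hmark p hpB).1 hpv with h | h
            · exact h
            · exact absurd h hpne
          have hpseen : p ∈ stB.2 := (hIff p hpB).1 hpold
          have hwseen : w ∈ stB.2 := hCl p hpseen w hstep
          have hwold : pvVp stA.2 w := (hIff w hstep.1.1).2 hwseen
          exact (hmark w hstep.1.1).2 (Or.inl hwold))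
    -- B side
    have hseednot : seed ∉ stB.2 := hB.2
    have hadd : PySem.Set.add stB.2 seed = stB.2 ++ [seed] := PySem.Set.add_of_not_mem hseednot
    obtain ⟨δB, b1, b2, b3, b4, b5, b6, b7, b8⟩ :=
      pvLoopB_char arr n m [seed] 0 PySem.Set.empty (PySem.Set.add stB.2 seed)
        (by
          intro p hp; rcases List.mem_singleton.1 hp with rfl
          exact ⟨hseedOk, by rw [hadd]; simp⟩)
        (by rw [hadd]; exact pvNodupSnoc stB.2 seed hSn hseednot)
        (by simp)
        (by simp)
        (by simp [PySem.Set.empty])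
        (by simp [PySem.Set.empty])
    -- matching the two components
    have hReachA : ∀ q, q ∈ δA ↔
        (pvOk arr n m q ∧ ¬ pvVp (pvVSet stA.2 i j 1) q ∧ pvReach arr n m seed q) := by
      intro q
      constructor
      · intro hq
        obtain ⟨hqOk, hqnv⟩ := a2 q hq
        have hqfin : pvVp (pvLoopA arr n m [seed] [seed] (PySem.Set.ofList [j])
            (pvVSet stA.2 i j 1)).2.2 q := (a4 q hqOk.1).2 (Or.inr hq)
        rcases ihC2 q hqOk.1 hqfin with h | ⟨p, hp, hr⟩
        · exact absurd h hqnv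
        · rcases List.mem_singleton.1 hp with rfl
          exact ⟨hqOk, hqnv, hr⟩
      · rintro ⟨hqOk, hqnv, hreach⟩
        have hqfin := pvReach_ind arr n m
          (pvVp (pvLoopA arr n m [seed] [seed] (PySem.Set.ofList [j])
            (pvVSet stA.2 i j 1)).2.2) seed q
          (ihMono seed hij hVp1seed) hij ihC4 hreach
        rcases (a4 q hqOk.1).1 hqfin with h | h
        · exact absurd h hqnv
        · exact h
    have hReachB : ∀ q, q ∈ δB ↔
        (pvOk arr n m q ∧ q ∉ PySem.Set.add stB.2 seed ∧ pvReach arr n m seed q) := by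
      intro q
      constructor
      · intro hq
        obtain ⟨hqOk, hqns⟩ := b3 q hq
        have hqfin : q ∈ (pvLoopB arr n m [seed] 0 PySem.Set.empty
            (PySem.Set.add stB.2 seed)).2.2 := by
          rw [b2]; exact List.mem_append_right _ hq
        rcases b5 q hqfin with h | ⟨p, hp, hr⟩
        · exact absurd h hqns
        · rcases List.mem_singleton.1 (by simpa using hp) with rfl
          exact ⟨hqOk, hqns, hr⟩
      · rintro ⟨hqOk, hqns, hreach⟩
        have hqfin := pvReach_ind arr n m
          (· ∈ (pvLoopB arr n m [seed] 0 PySem.Set.empty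
            (PySem.Set.add stB.2 seed)).2.2) seed q
          (by rw [b2]; exact List.mem_append_left _ (by rw [hadd]; simp)) hij
          (by
            intro p hpB hpmem w hstep
            rw [b2] at hpmem
            rcases List.mem_append.1 hpmem with hp | hp
            · rw [hadd] at hp
              rcases List.mem_append.1 hp with hp | hp
              · have := hCl p hp w hstep
                rw [b2, hadd]
                exact List.mem_append_left _ (List.mem_append_left _ this)
              · rcases List.mem_singleton.1 hp with rfl
                exact b6 seed (by rw [b1]; simp) w hstep
            · exact b6 p (by rw [b1]; exact List.mem_append_right _ hp) w hstep)
          hreach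
        rw [b2] at hqfin
        rcases List.mem_append.1 hqfin with h | h
        · exact absurd h hqns
        · exact h
    have hδ : ∀ q, q ∈ δA ↔ q ∈ δB := by
      intro q
      rw [hReachA q, hReachB q]
      constructor
      · rintro ⟨h1, h2, h3⟩
        refine ⟨h1, ?_, h3⟩
        intro hc
        exact h2 ((hVp1_iff q h1.1).2 hc)
      · rintro ⟨h1, h2, h3⟩
        refine ⟨h1, ?_, h3⟩
        intro hc
        exact h2 ((hVp1_iff q h1.1).1 hc)
    have hδAnd : δA.Nodup := (List.nodup_append.1 a3).2.1
    have hδBnd : δB.Nodup := by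
      have := b4
      rw [List.nodup_append] at this
      exact this.2.1
    have hδperm : δA.Perm δB := (List.perm_ext_iff_of_nodup hδAnd hδBnd).2 hδ
    have hlen : δA.length = δB.length := hδperm.length_eq
    set LA := pvLoopA arr n m [seed] [seed] (PySem.Set.ofList [j]) (pvVSet stA.2 i j 1)
      with hLA
    set LB := pvLoopB arr n m [seed] 0 PySem.Set.empty (PySem.Set.add stB.2 seed) with hLB
    have hlenA : LA.1.length = δA.length + 1 := by rw [a1]; simp
    have hlenB : LB.1.length = δB.length + 1 := by rw [b1]; simp
    have hsize : (LA.1.length : Int) = (LB.1.length : Int) := by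
      rw [hlenA, hlenB, hlen]
    have hcnt : (LA.1.length : Int) ≠ 0 := by
      rw [hlenA]; exact_mod_cast Nat.succ_ne_zero δA.length
    -- the members of LA.1 are in-grid and already marked
    have hLA1ok : ∀ p ∈ LA.1, pvOkB n m p := by
      intro p hp
      rw [a1] at hp
      rcases List.mem_append.1 hp with hp | hp
      · rcases List.mem_singleton.1 hp with rfl; exact hij
      · exact (a2 p hp).1.1
    have hLA1marked : ∀ p ∈ LA.1, pvVp LA.2.2 p := by
      intro p hp
      rw [a1] at hp
      rcases List.mem_append.1 hp with hp | hp
      · rcases List.mem_singleton.1 hp with rfl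
        exact ihMono seed hij hVp1seed
      · exact (a4 p (a2 p hp).1.1).2 (Or.inr hp)
    obtain ⟨hG3, hIff3⟩ := pvWriteback n m LA.1 (LA.1.length : Int) hcnt LA.2.2 ihG hLA1ok
    have hVp3 : ∀ q, pvOkB n m q →
        (pvVp (LA.1.foldl (fun v q => pvVSet v q.1 q.2 (LA.1.length : Int)) LA.2.2) q ↔
          pvVp LA.2.2 q) := by
      intro q hq
      rw [hIff3 q hq]
      constructor
      · rintro (h | h)
        · exact h
        · exact hLA1marked q h
      · exact Or.inl
    -- the two column sets are permutations of each other
    have hcolsmem : ∀ c, c ∈ LA.2.1 ↔ c ∈ LB.2.1 := by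
      intro c
      rw [a5 c, b7 c, b1]
      simp only [PySem.Set.mem_ofList, List.mem_singleton, List.mem_map, List.mem_append,
        List.mem_cons, List.not_mem_nil, or_false]
      constructor
      · rintro (rfl | ⟨p, hp, rfl⟩)
        · exact ⟨seed, Or.inl rfl, rfl⟩
        · exact ⟨p, Or.inr ((hδ p).1 hp), rfl⟩
      · rintro ⟨p, hp | hp, rfl⟩
        · subst hp; exact Or.inl rfl
        · exact Or.inr ⟨p, (hδ p).2 hp, rfl⟩
    have hcolsperm : LA.2.1.Perm LB.2.1 :=
      (List.perm_ext_iff_of_nodup (a6 (PySem.Set.nodup_ofList _)) b8).2 hcolsmem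
    -- assemble the six components of pvRel
    refine ⟨hG3, ?_, ?_, ?_, ?_, ?_⟩
    · show LB.2.2.Nodup
      rw [b2]; exact b4
    · show ∀ p ∈ LB.2.2, pvOk arr n m p
      intro p hp
      rw [b2] at hp
      rcases List.mem_append.1 hp with hp | hp
      · rw [hadd] at hp
        rcases List.mem_append.1 hp with hp | hp
        · exact hSok p hp
        · rcases List.mem_singleton.1 hp with rfl; exact hseedOk
      · exact (b3 p hp).1
    · show ∀ q, pvOkB n m q → (pvVp _ q ↔ q ∈ LB.2.2)
      intro q hq
      rw [hVp3 q hq, a4 q hq, hVp1_iff q hq, b2, List.mem_append, hδ q]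
    · show ∀ p ∈ LB.2.2, ∀ w, pvStepRel arr n m p w → w ∈ LB.2.2
      intro p hp w hstep
      rw [b2] at hp
      rcases List.mem_append.1 hp with hp | hp
      · rw [hadd] at hp
        rcases List.mem_append.1 hp with hp | hp
        · have := hCl p hp w hstep
          rw [b2, hadd]
          exact List.mem_append_left _ (List.mem_append_left _ this)
        · rcases List.mem_singleton.1 hp with rfl
          exact b6 seed (by rw [b1]; simp) w hstep
      · exact b6 p (by rw [b1]; exact List.mem_append_right _ hp) w hstep
    · show LA.2.1.foldl (fun o c => pvOilAdd o c (LA.1.length : Int)) stA.1 =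
        pvOilOf m (stB.1 ++ [((LB.1.length : Int), LB.2.1)])
      unfold pvOilOf
      rw [List.foldl_append]
      have : (stB.1.foldl (fun o sc => sc.2.foldl (fun o c => pvOilAdd o c sc.1) o)
          (PySem.List.pyRepeat [(0 : Int)] (m + 1))) = stA.1 := by
        rw [hOil]; rfl
      rw [List.foldl_cons, List.foldl_nil, this]
      haveI : RightCommutative (fun (o : List Int) (c : Int) =>
          pvOilAdd o c (LA.1.length : Int)) := ⟨fun a b c => pvOilAdd_comm a b _ c _⟩
      rw [← hsize]
      exact hcolsperm.foldl_eq stA.1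

lemma pvFoldRel {γ A B : Type} (R : A → B → Prop) (f : A → γ → A) (g : B → γ → B)
    (l : List γ) :
    ∀ a b, R a b → (∀ x ∈ l, ∀ a b, R a b → R (f a x) (g b x)) →
    R (l.foldl f a) (l.foldl g b) := by
  induction l with
  | nil => intro a b h _; exact h
  | cons x xs ih =>
      intro a b h hstep
      exact ih (f a x) (g b x) (hstep x List.mem_cons_self a b h)
        (fun y hy => hstep y (List.mem_cons_of_mem _ hy))

lemma pvMainMid (arr : List (List Int)) : solution arr = pvMidSol arr := by
  unfold solution pvMidSol
  simp only []
  set n : Int := PySem.List.len arr with hn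
  set m : Int := PySem.List.len ((PySem.List.pyGet? arr 0).getD []) with hm
  set visit0 : List (List Int) :=
    (PySem.List.pyRange 0 n 1).map (fun _ => PySem.List.pyRepeat [(0 : Int)] m) with hv0
  set oil0 : List Int := PySem.List.pyRepeat [(0 : Int)] (m + 1) with ho0
  have hG0 : pvGOOD n m visit0 := by
    constructor
    · rw [hv0, List.length_map, PySem.List.length_pyRange_one]
      simp
    · intro row hrow
      rw [hv0] at hrow
      obtain ⟨_, _, rfl⟩ := List.mem_map.1 hrow
      rw [PySem.List.pyRepeat_singleton, List.length_replicate]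
  have hVp0 : ∀ q, pvOkB n m q → ¬ pvVp visit0 q := by
    intro q hq
    rw [pvNotVp]
    obtain ⟨hr, hc, heq⟩ := pvVGet_good n m visit0 q hG0 hq
    rw [heq]
    simp only [hv0, List.getElem_map, PySem.List.pyRepeat_singleton, List.getElem_replicate]
  have hRel0 : pvRel arr n m (oil0, visit0) ([], PySem.Set.empty) := by
    refine ⟨hG0, by simp [PySem.Set.empty], by simp [PySem.Set.empty], ?_,
      by simp [PySem.Set.empty], rfl⟩
    intro q hq
    simp only [PySem.Set.empty, List.not_mem_nil, iff_false]
    exact hVp0 q hq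
  have hRelF := pvFoldRel (pvRel arr n m)
    (fun st i => (PySem.List.pyRange 0 m 1).foldl (fun st j => pvCellA arr n m i j st) st)
    (fun st si => (PySem.List.pyRange 0 m 1).foldl (fun st sj => pvCellB arr n m si sj st) st)
    (PySem.List.pyRange 0 n 1) (oil0, visit0) ([], PySem.Set.empty) hRel0
    (by
      intro i hi a b hab
      have hi' := (PySem.List.mem_pyRange_one).1 hi
      exact pvFoldRel (pvRel arr n m)
        (fun st j => pvCellA arr n m i j st)
        (fun st sj => pvCellB arr n m i sj st)
        (PySem.List.pyRange 0 m 1) a b hab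
        (by
          intro j hj a' b' hab'
          have hj' := (PySem.List.mem_pyRange_one).1 hj
          exact pvCell_rel arr n m i j ⟨by omega, by omega, by omega, by omega⟩ a' b' hab'))
  obtain ⟨_, _, _, _, _, hOilF⟩ := hRelF
  rw [hOilF]
  rfl

-- ============================================================================
-- Second half: pvMidSol = solution_alt (flood-fill components vs quick-find classes)
-- ============================================================================

def pvIdx (m : Int) (p : Int × Int) : Int := p.1 * m + p.2

def pvClassP (arr : List (List Int)) (n m : Int) (s q : Int × Int) : Prop :=
  pvOk arr n m q ∧ pvReach arr n m s q

-- the union edges generated at one scan cell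
def pvEdgesAt (arr : List (List Int)) (n m : Int) (p : Int × Int) : List (Int × Int) :=
  (if pvGetCell arr p.1 p.2 ≠ 0 ∧ p.2 + 1 < m ∧ pvGetCell arr p.1 (p.2 + 1) ≠ 0
     then [(p.1 * m + p.2, p.1 * m + p.2 + 1)] else []) ++
  (if pvGetCell arr p.1 p.2 ≠ 0 ∧ p.1 + 1 < n ∧ pvGetCell arr (p.1 + 1) p.2 ≠ 0
     then [(p.1 * m + p.2, (p.1 + 1) * m + p.2)] else [])

def pvAllE (arr : List (List Int)) (n m : Int) : List (Int × Int) :=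
  (pvCells n m).flatMap (pvEdgesAt arr n m)

def pvEqv (E : List (Int × Int)) (x y : Int) : Prop :=
  Relation.EqvGen (fun a b => (a, b) ∈ E) x y

-- quick-find invariant: comp has the grid size, values in range, equal labels = equivalent
def pvUF (N : Int) (E : List (Int × Int)) (comp : List Int) : Prop :=
  comp.length = N.toNat ∧
  (∀ x : Int, 0 ≤ x → x < N → 0 ≤ pvCf comp x ∧ pvCf comp x < N) ∧
  (∀ x y : Int, 0 ≤ x → x < N → 0 ≤ y → y < N →
    (pvCf comp x = pvCf comp y ↔ pvEqv E x y))

lemma pvEqv_mono (E E' : List (Int × Int)) (x y : Int) (h : pvEqv E x y) :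
    pvEqv (E ++ E') x y := by
  induction h with
  | rel a b hab => exact Relation.EqvGen.rel a b (List.mem_append_left _ hab)
  | refl a => exact Relation.EqvGen.refl a
  | symm a b _ ih => exact Relation.EqvGen.symm a b ih
  | trans a b c _ _ ih1 ih2 => exact Relation.EqvGen.trans a b c ih1 ih2

lemma pvEqv_refl (E : List (Int × Int)) (x : Int) : pvEqv E x x :=
  Relation.EqvGen.refl x

lemma pvEqv_symm (E : List (Int × Int)) {x y : Int} (h : pvEqv E x y) : pvEqv E y x :=
  Relation.EqvGen.symm x y h

lemma pvEqv_trans (E : List (Int × Int)) {x y z : Int} (h1 : pvEqv E x y)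
    (h2 : pvEqv E y z) : pvEqv E x z :=
  Relation.EqvGen.trans x y z h1 h2

lemma pvEqv_nil (x y : Int) : pvEqv [] x y ↔ x = y := by
  constructor
  · intro h
    induction h with
    | rel a b hab => simp at hab
    | refl a => rfl
    | symm a b _ ih => omega
    | trans a b c _ _ ih1 ih2 => omega
  · rintro rfl; exact Relation.EqvGen.refl x

lemma pvEqv_snoc (E : List (Int × Int)) (a b x y : Int) :
    pvEqv (E ++ [(a, b)]) x y ↔
      pvEqv E x y ∨ (pvEqv E x a ∧ pvEqv E b y) ∨ (pvEqv E x b ∧ pvEqv E a y) := by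
  constructor
  · intro h
    induction h with
    | rel u v huv =>
        rcases List.mem_append.1 huv with h1 | h1
        · exact Or.inl (Relation.EqvGen.rel u v h1)
        · simp only [List.mem_singleton, Prod.mk.injEq] at h1
          obtain ⟨rfl, rfl⟩ := h1
          exact Or.inr (Or.inl ⟨pvEqv_refl E u, pvEqv_refl E v⟩)
    | refl u => exact Or.inl (pvEqv_refl E u)
    | symm u v _ ih =>
        rcases ih with h1 | ⟨h1, h2⟩ | ⟨h1, h2⟩
        · exact Or.inl (pvEqv_symm E h1)
        · exact Or.inr (Or.inr ⟨pvEqv_symm E h2, pvEqv_symm E h1⟩)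
        · exact Or.inr (Or.inl ⟨pvEqv_symm E h2, pvEqv_symm E h1⟩)
    | trans u v w _ _ ih1 ih2 =>
        rcases ih1 with h1 | ⟨h1, h2⟩ | ⟨h1, h2⟩ <;>
          rcases ih2 with h3 | ⟨h3, h4⟩ | ⟨h3, h4⟩
        · exact Or.inl (pvEqv_trans E h1 h3)
        · exact Or.inr (Or.inl ⟨pvEqv_trans E h1 h3, h4⟩)
        · exact Or.inr (Or.inr ⟨pvEqv_trans E h1 h3, h4⟩)
        · exact Or.inr (Or.inl ⟨h1, pvEqv_trans E h2 h3⟩)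
        · exact Or.inr (Or.inl ⟨h1, h4⟩)
        · exact Or.inl (pvEqv_trans E h1 h4)
        · exact Or.inr (Or.inr ⟨h1, pvEqv_trans E h2 h3⟩)
        · exact Or.inl (pvEqv_trans E h1 h4)
        · exact Or.inr (Or.inr ⟨h1, h4⟩)
  · intro h
    have hab : pvEqv (E ++ [(a, b)]) a b :=
      Relation.EqvGen.rel a b (List.mem_append_right _ (List.mem_singleton.2 rfl))
    rcases h with h1 | ⟨h1, h2⟩ | ⟨h1, h2⟩
    · exact pvEqv_mono E _ x y h1
    · exact pvEqv_trans _ (pvEqv_mono E _ _ _ h1)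
        (pvEqv_trans _ hab (pvEqv_mono E _ _ _ h2))
    · exact pvEqv_trans _ (pvEqv_mono E _ _ _ h1)
        (pvEqv_trans _ (pvEqv_symm _ hab) (pvEqv_mono E _ _ _ h2))

lemma pvCf_map (comp : List Int) (f : Int → Int) (x : Int) (h0 : 0 ≤ x)
    (hx : x.toNat < comp.length) : pvCf (comp.map f) x = f (pvCf comp x) := by
  unfold pvCf
  rw [PySem.List.pyGet?_of_nonneg (h := h0), PySem.List.pyGet?_of_nonneg (h := h0)]
  rw [List.getElem?_map, List.getElem?_eq_getElem hx]
  simp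

lemma pvUF_union (N : Int) (E : List (Int × Int)) (comp : List Int) (a b : Int)
    (h : pvUF N E comp) (ha0 : 0 ≤ a) (haN : a < N) (hb0 : 0 ≤ b) (hbN : b < N) :
    pvUF N (E ++ [(a, b)]) (ufUnion comp a b) := by
  obtain ⟨hlen, hrange, hiff⟩ := h
  have hEab : pvEqv E a b ↔ pvCf comp a = pvCf comp b := (hiff a b ha0 haN hb0 hbN).symm
  simp only [ufUnion]
  by_cases hc : pvCf comp a = pvCf comp b
  · rw [if_pos hc]
    refine ⟨hlen, hrange, ?_⟩
    intro x y hx0 hxN hy0 hyN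
    rw [hiff x y hx0 hxN hy0 hyN, pvEqv_snoc]
    constructor
    · exact Or.inl
    · rintro (h1 | ⟨h1, h2⟩ | ⟨h1, h2⟩)
      · exact h1
      · exact pvEqv_trans E h1 (pvEqv_trans E (hEab.2 hc) h2)
      · exact pvEqv_trans E h1 (pvEqv_trans E (pvEqv_symm E (hEab.2 hc)) h2)
  · rw [if_neg hc]
    have hmap : ∀ x : Int, 0 ≤ x → x < N →
        pvCf (comp.map (fun v => if v = pvCf comp a then pvCf comp b else v)) x
          = if pvCf comp x = pvCf comp a then pvCf comp b else pvCf comp x := by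
      intro x hx0 hxN
      exact pvCf_map comp _ x hx0 (by rw [hlen]; omega)
    refine ⟨by rw [List.length_map, hlen], ?_, ?_⟩
    · intro x hx0 hxN
      rw [hmap x hx0 hxN]
      split_ifs
      · exact hrange b hb0 hbN
      · exact hrange x hx0 hxN
    · intro x y hx0 hxN hy0 hyN
      rw [hmap x hx0 hxN, hmap y hy0 hyN, pvEqv_snoc]
      have hxa := hiff x a hx0 hxN ha0 haN
      have hya := hiff y a hy0 hyN ha0 haN
      have hxb := hiff x b hx0 hxN hb0 hbN
      have hyb := hiff y b hy0 hyN hb0 hbN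
      have hxy := hiff x y hx0 hxN hy0 hyN
      by_cases h1 : pvCf comp x = pvCf comp a <;> by_cases h2 : pvCf comp y = pvCf comp a
      · rw [if_pos h1, if_pos h2]
        constructor
        · intro _; exact Or.inl (hxy.1 (h1.trans h2.symm))
        · intro _; rfl
      · rw [if_pos h1, if_neg h2]
        constructor
        · intro hcb
          exact Or.inr (Or.inl ⟨hxa.1 h1, pvEqv_symm E (hyb.1 hcb.symm)⟩)
        · rintro (hE | ⟨hE1, hE2⟩ | ⟨hE1, hE2⟩)
          · exact absurd (hxy.2 hE) (fun hh => h2 (hh.symm.trans h1))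
          · exact (hyb.2 (pvEqv_symm E hE2)).symm
          · exact absurd (hya.2 (pvEqv_symm E hE2)) h2
      · rw [if_neg h1, if_pos h2]
        constructor
        · intro hcb
          exact Or.inr (Or.inr ⟨hxb.1 hcb, pvEqv_symm E (hya.1 h2)⟩)
        · rintro (hE | ⟨hE1, hE2⟩ | ⟨hE1, hE2⟩)
          · exact absurd ((hxy.2 hE).trans h2) h1
          · exact absurd (hxa.2 hE1) h1
          · exact hxb.2 hE1
      · rw [if_neg h1, if_neg h2]
        rw [hxy]
        constructor
        · exact Or.inl
        · rintro (hE | ⟨hE1, hE2⟩ | ⟨hE1, hE2⟩)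
          · exact hE
          · exact absurd (hxa.2 hE1) h1
          · exact absurd (hya.2 (pvEqv_symm E hE2)) h2

lemma pvIdx_bounds (n m : Int) (p : Int × Int) (h : pvOkB n m p) :
    0 ≤ pvIdx m p ∧ pvIdx m p < n * m := by
  obtain ⟨h1, h2, h3, h4⟩ := h
  unfold pvIdx
  constructor
  · have := mul_nonneg h1 (by omega : (0:Int) ≤ m)
    omega
  · have hstep : p.1 * m + m ≤ n * m := by
      have : (p.1 + 1) * m ≤ n * m :=
        mul_le_mul_of_nonneg_right (by omega) (by omega)
      nlinarith
    omega

lemma pvIdx_inj (n m : Int) (p q : Int × Int) (hp : pvOkB n m p) (hq : pvOkB n m q)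
    (h : pvIdx m p = pvIdx m q) : p = q := by
  obtain ⟨a1, a2, a3, a4⟩ := hp
  obtain ⟨b1, b2, b3, b4⟩ := hq
  unfold pvIdx at h
  have h1 : p.1 = q.1 := by
    rcases lt_trichotomy p.1 q.1 with hlt | heq | hgt
    · exfalso
      have : (p.1 + 1) * m ≤ q.1 * m := mul_le_mul_of_nonneg_right (by omega) (by omega)
      nlinarith
    · exact heq
    · exfalso
      have : (q.1 + 1) * m ≤ p.1 * m := mul_le_mul_of_nonneg_right (by omega) (by omega)
      nlinarith
  have h2 : p.2 = q.2 := by rw [h1] at h; omega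
  exact Prod.ext h1 h2

lemma pvMem_cells (n m : Int) (p : Int × Int) : p ∈ pvCells n m ↔ pvOkB n m p := by
  unfold pvCells pvOkB
  simp only [SProd.sprod, List.product, List.mem_flatMap, List.mem_map]
  constructor
  · rintro ⟨i, hi, j, hj, rfl⟩
    rw [PySem.List.mem_pyRange_one] at hi hj
    exact ⟨hi.1, hi.2, hj.1, hj.2⟩
  · rintro ⟨h1, h2, h3, h4⟩
    exact ⟨p.1, PySem.List.mem_pyRange_one.2 ⟨h1, h2⟩, p.2,
      PySem.List.mem_pyRange_one.2 ⟨h3, h4⟩, rfl⟩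

lemma pvCells_nodup (n m : Int) : (pvCells n m).Nodup := by
  unfold pvCells
  simp only [SProd.sprod]
  exact List.Nodup.product (PySem.List.nodup_pyRange_one 0 n) (PySem.List.nodup_pyRange_one 0 m)

lemma pvFoldFlat {α β σ : Type} (l : List α) (f : α → List β) (g : σ → β → σ) (init : σ) :
    (l.flatMap f).foldl g init = l.foldl (fun s a => (f a).foldl g s) init := by
  induction l generalizing init with
  | nil => simp
  | cons a t ih => rw [List.flatMap_cons, List.foldl_append, List.foldl_cons, ih]

lemma pvFoldCells {σ : Type} (g : σ → Int → Int → σ) (init : σ) (n m : Int) :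
    (PySem.List.pyRange 0 n 1).foldl
      (fun s i => (PySem.List.pyRange 0 m 1).foldl (fun s j => g s i j) s) init
    = (pvCells n m).foldl (fun s p => g s p.1 p.2) init := by
  unfold pvCells
  simp only [SProd.sprod, List.product]
  rw [pvFoldFlat]
  congr 1
  funext s i
  rw [List.foldl_map]

lemma pvFlatNat (n m : Nat) :
    ((PySem.List.pyRange 0 (n : Int) 1).flatMap
        (fun i => (PySem.List.pyRange 0 (m : Int) 1).map (fun j => i * (m : Int) + j)))
      = PySem.List.pyRange 0 ((n * m : Nat) : Int) 1 := by
  induction n with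
  | zero =>
      rw [Nat.cast_zero, PySem.List.pyRange_one_eq_nil (le_refl 0), Nat.zero_mul,
        Nat.cast_zero, PySem.List.pyRange_one_eq_nil (le_refl 0)]
      rfl
  | succ n ih =>
      have hcast : ((n + 1 : Nat) : Int) = (n : Int) + 1 := by push_cast; ring
      rw [hcast, PySem.List.pyRange_one_succ_right (by positivity), List.flatMap_append, ih]
      have hsplit : PySem.List.pyRange 0 (((n + 1) * m : Nat) : Int) 1
          = PySem.List.pyRange 0 ((n * m : Nat) : Int) 1
            ++ PySem.List.pyRange ((n * m : Nat) : Int) (((n + 1) * m : Nat) : Int) 1 := by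
        rw [PySem.List.pyRange_one_append 0 ((n * m : Nat) : Int) (((n + 1) * m : Nat) : Int)
          (by positivity) (by exact_mod_cast Nat.mul_le_mul_right m (Nat.le_succ n))]
      rw [hsplit]
      congr 1
      rw [List.flatMap_singleton]
      rw [PySem.List.pyRange_one 0 (m : Int), PySem.List.pyRange_one ((n * m : Nat) : Int)]
      rw [List.map_map]
      have hlen : ((((n + 1) * m : Nat) : Int) - ((n * m : Nat) : Int)).toNat = m := by
        have he : (((n + 1) * m : Nat) : Int) = ((n * m : Nat) : Int) + (m : Int) := by
          push_cast; ring
        rw [he]; omega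
      have hlen2 : (((m : Nat) : Int) - 0).toNat = m := by omega
      rw [hlen, hlen2]
      apply List.map_congr_left
      intro k hk
      simp only [Function.comp_apply]
      push_cast
      ring

lemma pvComp0_spec (n m : Int) (hn : 0 ≤ n) (hm : 0 ≤ m) :
    ((PySem.List.pyRange 0 n 1).flatMap
        (fun i => (PySem.List.pyRange 0 m 1).map (fun j => i * m + j))).length
      = (n * m).toNat ∧
    (∀ x : Int, 0 ≤ x → x < n * m →
      pvCf ((PySem.List.pyRange 0 n 1).flatMap
        (fun i => (PySem.List.pyRange 0 m 1).map (fun j => i * m + j))) x = x) := by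
  obtain ⟨n', rfl⟩ := Int.eq_ofNat_of_zero_le hn
  obtain ⟨m', rfl⟩ := Int.eq_ofNat_of_zero_le hm
  rw [pvFlatNat n' m']
  constructor
  · rw [PySem.List.length_pyRange_one]
    push_cast
    omega
  · intro x hx0 hxN
    unfold pvCf
    rw [PySem.List.pyGet?_of_nonneg (h := hx0)]
    have hlt : x.toNat < (PySem.List.pyRange 0 ((n' * m' : Nat) : Int) 1).length := by
      rw [PySem.List.length_pyRange_one]
      push_cast at hxN ⊢
      omega
    rw [List.getElem?_eq_getElem hlt, PySem.List.getElem_pyRange_one]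
    simp
    omega

lemma pvUF_step (arr : List (List Int)) (n m : Int) (E : List (Int × Int)) (comp : List Int)
    (p : Int × Int) (hp : pvOkB n m p) (h : pvUF (n * m) E comp) :
    pvUF (n * m) (E ++ pvEdgesAt arr n m p) (pvUStep arr n m comp p.1 p.2) := by
  obtain ⟨h1, h2, h3, h4⟩ := hp
  have hb0 := pvIdx_bounds n m p ⟨h1, h2, h3, h4⟩
  simp only [pvIdx] at hb0
  simp only [pvUStep, pvEdgesAt]
  by_cases hoil : pvGetCell arr p.1 p.2 ≠ 0
  · rw [if_pos hoil]
    by_cases g1 : p.2 + 1 < m ∧ pvGetCell arr p.1 (p.2 + 1) ≠ 0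
    · rw [if_pos g1, if_pos ⟨hoil, g1⟩]
      have hbr := pvIdx_bounds n m (p.1, p.2 + 1) ⟨h1, h2, by omega, g1.1⟩
      simp only [pvIdx] at hbr
      have hu1 : pvUF (n * m) (E ++ [(p.1 * m + p.2, p.1 * m + p.2 + 1)])
          (ufUnion comp (p.1 * m + p.2) (p.1 * m + p.2 + 1)) :=
        pvUF_union _ _ _ _ _ h (by omega) (by omega) (by omega) (by omega)
      by_cases g2 : p.1 + 1 < n ∧ pvGetCell arr (p.1 + 1) p.2 ≠ 0
      · rw [if_pos g2, if_pos ⟨hoil, g2⟩]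
        have hbd := pvIdx_bounds n m (p.1 + 1, p.2) ⟨by omega, g2.1, h3, h4⟩
        simp only [pvIdx] at hbd
        rw [show E ++ ([(p.1 * m + p.2, p.1 * m + p.2 + 1)] ++ [(p.1 * m + p.2, (p.1 + 1) * m + p.2)])
            = (E ++ [(p.1 * m + p.2, p.1 * m + p.2 + 1)]) ++ [(p.1 * m + p.2, (p.1 + 1) * m + p.2)]
          from (List.append_assoc _ _ _).symm]
        exact pvUF_union _ _ _ _ _ hu1 (by omega) (by omega) (by omega) (by omega)
      · rw [if_neg g2, if_neg (fun hc => g2 hc.2), List.append_nil]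
        exact hu1
    · rw [if_neg g1, if_neg (fun hc => g1 hc.2), List.nil_append]
      by_cases g2 : p.1 + 1 < n ∧ pvGetCell arr (p.1 + 1) p.2 ≠ 0
      · rw [if_pos g2, if_pos ⟨hoil, g2⟩]
        have hbd := pvIdx_bounds n m (p.1 + 1, p.2) ⟨by omega, g2.1, h3, h4⟩
        simp only [pvIdx] at hbd
        exact pvUF_union _ _ _ _ _ h (by omega) (by omega) (by omega) (by omega)
      · rw [if_neg g2, if_neg (fun hc => g2 hc.2), List.append_nil]
        exact h
  · rw [if_neg hoil, if_neg (fun hc => hoil hc.1), if_neg (fun hc => hoil hc.1)]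
    simpa using h

lemma pvUF_scan (arr : List (List Int)) (n m : Int) :
    ∀ (L : List (Int × Int)) (comp : List Int) (E : List (Int × Int)),
    pvUF (n * m) E comp → (∀ p ∈ L, pvOkB n m p) →
    pvUF (n * m) (E ++ L.flatMap (pvEdgesAt arr n m))
      (L.foldl (fun c p => pvUStep arr n m c p.1 p.2) comp) := by
  intro L
  induction L with
  | nil => intro comp E h _; simpa using h
  | cons p L ih =>
      intro comp E h hL
      rw [List.flatMap_cons, List.foldl_cons, ← List.append_assoc]
      exact ih _ _ (pvUF_step arr n m E comp p (hL p List.mem_cons_self) h)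
        (fun q hq => hL q (List.mem_cons_of_mem _ hq))

lemma pvAdj_symm (p q : Int × Int) (h : pvAdj p q) : pvAdj q p := by
  obtain ⟨d, hd, rfl⟩ := h
  unfold pvD at hd
  fin_cases hd
  · exact ⟨(1, 0), by simp [pvD], by simp [Prod.ext_iff]⟩
  · exact ⟨(0, 1), by simp [pvD], by simp [Prod.ext_iff]⟩
  · exact ⟨(-1, 0), by simp [pvD], by simp [Prod.ext_iff]⟩
  · exact ⟨(0, -1), by simp [pvD], by simp [Prod.ext_iff]⟩

lemma pvReach_ok (arr : List (List Int)) (n m : Int) (p q : Int × Int)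
    (hp : pvOk arr n m p) (h : pvReach arr n m p q) : pvOk arr n m q := by
  induction h with
  | refl => exact hp
  | tail _ hs ih => exact hs.1

lemma pvReach_symm (arr : List (List Int)) (n m : Int) (p q : Int × Int)
    (hp : pvOk arr n m p) (h : pvReach arr n m p q) : pvReach arr n m q p := by
  induction h with
  | refl => exact Relation.ReflTransGen.refl
  | tail hr hs ih =>
      have hb := pvReach_ok arr n m p _ hp hr
      exact Relation.ReflTransGen.head ⟨hb, pvAdj_symm _ _ hs.2⟩ ih

lemma pvMem_allE (arr : List (List Int)) (n m : Int) (x y : Int) :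
    (x, y) ∈ pvAllE arr n m ↔
      ∃ i j : Int, (0 ≤ i ∧ i < n ∧ 0 ≤ j ∧ j < m) ∧ pvGetCell arr i j ≠ 0 ∧
        ((j + 1 < m ∧ pvGetCell arr i (j + 1) ≠ 0 ∧ x = i * m + j ∧ y = i * m + j + 1) ∨
         (i + 1 < n ∧ pvGetCell arr (i + 1) j ≠ 0 ∧ x = i * m + j ∧ y = (i + 1) * m + j)) := by
  unfold pvAllE
  rw [List.mem_flatMap]
  constructor
  · rintro ⟨p, hpc, hpe⟩
    have hpB := (pvMem_cells n m p).1 hpc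
    unfold pvEdgesAt at hpe
    rcases List.mem_append.1 hpe with he | he
    · split_ifs at he with hc
      · rcases List.mem_singleton.1 he with he2
        obtain ⟨rfl, rfl⟩ : x = p.1 * m + p.2 ∧ y = p.1 * m + p.2 + 1 := by
          exact ⟨congrArg Prod.fst he2, congrArg Prod.snd he2⟩
        exact ⟨p.1, p.2, hpB, hc.1, Or.inl ⟨hc.2.1, hc.2.2, rfl, rfl⟩⟩
      · simp at he
    · split_ifs at he with hc
      · rcases List.mem_singleton.1 he with he2
        obtain ⟨rfl, rfl⟩ : x = p.1 * m + p.2 ∧ y = (p.1 + 1) * m + p.2 := by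
          exact ⟨congrArg Prod.fst he2, congrArg Prod.snd he2⟩
        exact ⟨p.1, p.2, hpB, hc.1, Or.inr ⟨hc.2.1, hc.2.2, rfl, rfl⟩⟩
      · simp at he
  · rintro ⟨i, j, hB, hoil, hcase⟩
    refine ⟨(i, j), (pvMem_cells n m (i, j)).2 hB, ?_⟩
    unfold pvEdgesAt
    rcases hcase with ⟨hg1, hg2, rfl, rfl⟩ | ⟨hg1, hg2, rfl, rfl⟩
    · exact List.mem_append_left _ (by rw [if_pos ⟨hoil, hg1, hg2⟩]; simp)
    · exact List.mem_append_right _ (by rw [if_pos ⟨hoil, hg1, hg2⟩]; simp)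

lemma pvEqv_of_adj (arr : List (List Int)) (n m : Int) (p q : Int × Int)
    (hp : pvOk arr n m p) (hq : pvOk arr n m q) (hadj : pvAdj p q) :
    pvEqv (pvAllE arr n m) (pvIdx m p) (pvIdx m q) := by
  obtain ⟨⟨a1, a2, a3, a4⟩, ac⟩ := hp
  obtain ⟨⟨b1, b2, b3, b4⟩, bc⟩ := hq
  obtain ⟨d, hd, hqd⟩ := hadj
  unfold pvD at hd
  fin_cases hd
  -- d = (-1, 0) : q is above p, so p is the down neighbour of q
  · apply pvEqv_symm
    apply Relation.EqvGen.rel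
    rw [pvMem_allE]
    refine ⟨q.1, q.2, ⟨b1, b2, b3, b4⟩, bc, Or.inr ⟨?_, ?_, ?_, ?_⟩⟩
    · rw [hqd]; try simp; try omega
    · have e1 : q.1 + 1 = p.1 := by rw [hqd]; try simp; try omega
      have e2 : q.2 = p.2 := by rw [hqd]; try simp; try omega
      rw [e1, e2]; exact ac
    · rfl
    · unfold pvIdx
      have e1 : q.1 + 1 = p.1 := by rw [hqd]; try simp; try omega
      have e2 : q.2 = p.2 := by rw [hqd]; try simp; try omega
      rw [← e1, ← e2]
  -- d = (0, -1) : q is left of p, p is the right neighbour of q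
  · apply pvEqv_symm
    apply Relation.EqvGen.rel
    rw [pvMem_allE]
    refine ⟨q.1, q.2, ⟨b1, b2, b3, b4⟩, bc, Or.inl ⟨?_, ?_, ?_, ?_⟩⟩
    · rw [hqd]; try simp; try omega
    · have e1 : q.1 = p.1 := by rw [hqd]; try simp; try omega
      have e2 : q.2 + 1 = p.2 := by rw [hqd]; try simp; try omega
      rw [e1, e2]; exact ac
    · rfl
    · unfold pvIdx
      have e1 : q.1 = p.1 := by rw [hqd]; try simp; try omega
      have e2 : q.2 + 1 = p.2 := by rw [hqd]; try simp; try omega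
      rw [← e1, ← e2]
      omega
  -- d = (1, 0) : q is the down neighbour of p
  · apply Relation.EqvGen.rel
    rw [pvMem_allE]
    refine ⟨p.1, p.2, ⟨a1, a2, a3, a4⟩, ac, Or.inr ⟨?_, ?_, ?_, ?_⟩⟩
    · rw [hqd] at b2; simpa using b2
    · have e1 : p.1 + 1 = q.1 := by rw [hqd]; try simp; try omega
      have e2 : p.2 = q.2 := by rw [hqd]; try simp; try omega
      rw [e1, e2]; exact bc
    · rfl
    · unfold pvIdx
      have e1 : p.1 + 1 = q.1 := by rw [hqd]; try simp; try omega
      have e2 : p.2 = q.2 := by rw [hqd]; try simp; try omega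
      rw [e1, e2]
  -- d = (0, 1) : q is the right neighbour of p
  · apply Relation.EqvGen.rel
    rw [pvMem_allE]
    refine ⟨p.1, p.2, ⟨a1, a2, a3, a4⟩, ac, Or.inl ⟨?_, ?_, ?_, ?_⟩⟩
    · rw [hqd] at b4; simpa using b4
    · have e1 : p.1 = q.1 := by rw [hqd]; try simp; try omega
      have e2 : p.2 + 1 = q.2 := by rw [hqd]; try simp; try omega
      rw [e1, e2]; exact bc
    · rfl
    · unfold pvIdx
      have e1 : p.1 = q.1 := by rw [hqd]; try simp; try omega
      have e2 : p.2 + 1 = q.2 := by rw [hqd]; try simp; try omega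
      rw [e1, ← e2]
      omega

lemma pvEqv_of_reach (arr : List (List Int)) (n m : Int) (p q : Int × Int)
    (hp : pvOk arr n m p) (h : pvReach arr n m p q) :
    pvEqv (pvAllE arr n m) (pvIdx m p) (pvIdx m q) := by
  induction h with
  | refl => exact pvEqv_refl _ _
  | tail hr hs ih =>
      exact pvEqv_trans _ ih
        (pvEqv_of_adj arr n m _ _ (pvReach_ok arr n m p _ hp hr) hs.1 hs.2)

lemma pvReach_of_eqv (arr : List (List Int)) (n m : Int) (x y : Int)
    (h : pvEqv (pvAllE arr n m) x y) :
    x = y ∨ ∃ p q : Int × Int, pvOk arr n m p ∧ pvOk arr n m q ∧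
      x = pvIdx m p ∧ y = pvIdx m q ∧ pvReach arr n m p q := by
  induction h with
  | rel u v huv =>
      rw [pvMem_allE] at huv
      obtain ⟨i, j, hB, hoil, hcase⟩ := huv
      rcases hcase with ⟨hg1, hg2, rfl, rfl⟩ | ⟨hg1, hg2, rfl, rfl⟩
      · refine Or.inr ⟨(i, j), (i, j + 1), ⟨hB, hoil⟩,
          ⟨⟨hB.1, hB.2.1, by omega, hg1⟩, hg2⟩, rfl, by unfold pvIdx; simp; omega, ?_⟩
        exact Relation.ReflTransGen.single
          ⟨⟨⟨hB.1, hB.2.1, by omega, hg1⟩, hg2⟩, (0, 1), by simp [pvD], by simp⟩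
      · refine Or.inr ⟨(i, j), (i + 1, j), ⟨hB, hoil⟩,
          ⟨⟨by omega, hg1, hB.2.2.1, hB.2.2.2⟩, hg2⟩, rfl, by unfold pvIdx; simp, ?_⟩
        exact Relation.ReflTransGen.single
          ⟨⟨⟨by omega, hg1, hB.2.2.1, hB.2.2.2⟩, hg2⟩, (1, 0), by simp [pvD], by simp⟩
  | refl u => exact Or.inl rfl
  | symm u v _ ih =>
      rcases ih with rfl | ⟨p, q, hpo, hqo, rfl, rfl, hr⟩
      · exact Or.inl rfl
      · exact Or.inr ⟨q, p, hqo, hpo, rfl, rfl, pvReach_symm arr n m p q hpo hr⟩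
  | trans u v w _ _ ih1 ih2 =>
      rcases ih1 with rfl | ⟨p, q, hpo, hqo, rfl, hv, hr1⟩
      · exact ih2
      · rcases ih2 with rfl | ⟨p', q', hpo', hqo', hv', rfl, hr2⟩
        · exact Or.inr ⟨p, q, hpo, hqo, rfl, hv, hr1⟩
        · have hqq : q = p' := pvIdx_inj n m q p' hqo.1 hpo'.1 (hv ▸ hv')
          exact Or.inr ⟨p, q', hpo, hqo', rfl, rfl,
            Relation.ReflTransGen.trans hr1 (hqq ▸ hr2)⟩

lemma pvRootChar (arr : List (List Int)) (n m : Int) (comp : List Int)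
    (h : pvUF (n * m) (pvAllE arr n m) comp) (p q : Int × Int)
    (hp : pvOk arr n m p) (hq : pvOk arr n m q) :
    pvCf comp (pvIdx m p) = pvCf comp (pvIdx m q) ↔ pvReach arr n m p q := by
  have hbp := pvIdx_bounds n m p hp.1
  have hbq := pvIdx_bounds n m q hq.1
  rw [h.2.2 (pvIdx m p) (pvIdx m q) hbp.1 hbp.2 hbq.1 hbq.2]
  constructor
  · intro he
    rcases pvReach_of_eqv arr n m _ _ he with heq | ⟨p', q', hpo', hqo', hvp, hvq, hr⟩
    · have heq2 : p = q := pvIdx_inj n m p q hp.1 hq.1 heq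
      rw [heq2]
      exact Relation.ReflTransGen.refl
    · have e1 : p = p' := pvIdx_inj n m p p' hp.1 hpo'.1 hvp
      have e2 : q = q' := pvIdx_inj n m q q' hq.1 hqo'.1 hvq
      rw [e1, e2]; exact hr
  · exact pvEqv_of_reach arr n m p q hp

lemma pvDictCount (key : (Int × Int) → Int) :
    ∀ (l : List (Int × Int)) (d : PySem.Dict Int Int) (r : Int),
    (l.foldl (fun d x => d.insert (key x) (d.getD (key x) 0 + 1)) d).getD r 0
      = d.getD r 0 + ((l.map key).count r : Int) := by
  intro l
  induction l with
  | nil => intro d r; simp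
  | cons x t ih =>
      intro d r
      rw [List.foldl_cons, ih, List.map_cons, PySem.Dict.getD_insert]
      by_cases h : r = key x
      · rw [if_pos h, h, List.count_cons_self]
        push_cast
        omega
      · rw [if_neg h, List.count_cons_of_ne (Ne.symm h)]

lemma pvSizeChar (arr : List (List Int)) (n m : Int) (comp : List Int) (r : Int) :
    ((PySem.List.pyRange 0 n 1).foldl (fun d i =>
        (PySem.List.pyRange 0 m 1).foldl (fun d j => pvSizeStep arr m comp d i j) d)
      PySem.Dict.empty).getD r 0
    = ((((pvCells n m).filter (fun p => decide (pvGetCell arr p.1 p.2 ≠ 0))).map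
        (fun p => pvCf comp (pvIdx m p))).count r : Int) := by
  rw [pvFoldCells (g := fun d i j => pvSizeStep arr m comp d i j)]
  simp only [pvSizeStep]
  have key : (pvCells n m).foldl
      (fun (s : PySem.Dict Int Int) (q : Int × Int) =>
        if pvGetCell arr q.1 q.2 ≠ 0 then
          s.insert (pvCf comp (q.1 * m + q.2)) (s.getD (pvCf comp (q.1 * m + q.2)) 0 + 1)
        else s) PySem.Dict.empty
      = ((pvCells n m).filter (fun q => decide (pvGetCell arr q.1 q.2 ≠ 0))).foldl
        (fun (d : PySem.Dict Int Int) (q : Int × Int) =>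
          d.insert (pvCf comp (q.1 * m + q.2)) (d.getD (pvCf comp (q.1 * m + q.2)) 0 + 1))
        PySem.Dict.empty :=
    PySem.List.foldl_ite_eq_foldl_filter
      (p := fun q : Int × Int => pvGetCell arr q.1 q.2 ≠ 0)
      (f := fun (d : PySem.Dict Int Int) (q : Int × Int) =>
        d.insert (pvCf comp (q.1 * m + q.2)) (d.getD (pvCf comp (q.1 * m + q.2)) 0 + 1))
      (pvCells n m) PySem.Dict.empty
  rw [key]
  have hc : (((pvCells n m).filter (fun q => decide (pvGetCell arr q.1 q.2 ≠ 0))).foldl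
      (fun (d : PySem.Dict Int Int) (q : Int × Int) =>
        d.insert (pvCf comp (q.1 * m + q.2)) (d.getD (pvCf comp (q.1 * m + q.2)) 0 + 1))
      PySem.Dict.empty).getD r 0
      = (PySem.Dict.empty : PySem.Dict Int Int).getD r 0
        + (((((pvCells n m).filter (fun q => decide (pvGetCell arr q.1 q.2 ≠ 0))).map
            (fun q => pvCf comp (q.1 * m + q.2))).count r : Nat) : Int) :=
    pvDictCount (fun q : Int × Int => pvCf comp (q.1 * m + q.2)) _ _ _
  simp only [pvIdx]
  rw [hc]
  simp

lemma pvAcc_spec (arr : List (List Int)) (m : Int) (comp : List Int)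
    (size : PySem.Dict Int Int) :
    ∀ (L : List (Int × Int)) (o : List Int) (S : PySem.Set (Int × Int)), S.Nodup →
    ∃ K : List (Int × Int),
      (L.foldl (fun st p => pvAccStep arr m comp size st p.1 p.2) (o, S)).2 = S ++ K ∧
      (S ++ K).Nodup ∧
      (L.foldl (fun st p => pvAccStep arr m comp size st p.1 p.2) (o, S)).1
        = K.foldl (fun o k => pvOilAdd o k.2 (size.getD k.1 0)) o ∧
      (∀ k, k ∈ K ↔ k ∉ S ∧ ∃ p ∈ L, pvGetCell arr p.1 p.2 ≠ 0 ∧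
        k = (pvCf comp (pvIdx m p), p.2)) := by
  intro L
  induction L with
  | nil =>
      intro o S hS
      exact ⟨[], by simp, by simpa using hS, by simp, by simp⟩
  | cons p L ih =>
      intro o S hS
      simp only [List.foldl_cons]
      by_cases hc : pvGetCell arr p.1 p.2 ≠ 0 ∧ ¬ (pvCf comp (p.1 * m + p.2), p.2) ∈ S
      · have hstep : pvAccStep arr m comp size (o, S) p.1 p.2
            = (pvOilAdd o p.2 (size.getD (pvCf comp (p.1 * m + p.2)) 0),
               PySem.Set.add S (pvCf comp (p.1 * m + p.2), p.2)) := by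
          simp only [pvAccStep]; rw [if_pos hc]
        set k0 : Int × Int := (pvCf comp (p.1 * m + p.2), p.2) with hk0
        have hadd : PySem.Set.add S k0 = S ++ [k0] := PySem.Set.add_of_not_mem hc.2
        have hS1 : (PySem.Set.add S k0).Nodup := PySem.Set.nodup_add _ _ hS
        obtain ⟨K', e1, e2, e3, e4⟩ := ih (pvOilAdd o p.2 (size.getD k0.1 0)) (PySem.Set.add S k0) hS1
        rw [hstep]
        refine ⟨k0 :: K', ?_, ?_, ?_, ?_⟩
        · rw [e1, hadd, List.append_assoc]; rfl
        · have := e2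
          rw [hadd, List.append_assoc] at this
          exact this
        · rw [e3]; rfl
        · intro k
          constructor
          · intro hk
            rcases List.mem_cons.1 hk with rfl | hk'
            · exact ⟨hc.2, p, List.mem_cons_self, hc.1, rfl⟩
            · obtain ⟨hns, q, hq, hqoil, hqk⟩ := (e4 k).1 hk'
              rw [hadd] at hns
              refine ⟨fun hcm => hns (List.mem_append_left _ hcm),
                q, List.mem_cons_of_mem _ hq, hqoil, hqk⟩
          · rintro ⟨hns, q, hq, hqoil, hqk⟩
            rcases List.mem_cons.1 hq with rfl | hq'
            · have hk : k = k0 := by rw [hqk]; rfl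
              rw [hk]; exact List.mem_cons_self
            · by_cases hkk : k = k0
              · rw [hkk]; exact List.mem_cons_self
              · refine List.mem_cons_of_mem _ ((e4 k).2 ⟨?_, q, hq', hqoil, hqk⟩)
                rw [hadd]
                intro hmem
                rcases List.mem_append.1 hmem with hmem | hmem
                · exact hns hmem
                · exact hkk (List.mem_singleton.1 hmem)
      · have hstep : pvAccStep arr m comp size (o, S) p.1 p.2 = (o, S) := by
          simp only [pvAccStep]; rw [if_neg hc]
        obtain ⟨K, e1, e2, e3, e4⟩ := ih o S hS
        rw [hstep]
        refine ⟨K, e1, e2, e3, ?_⟩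
        intro k
        rw [e4 k]
        constructor
        · rintro ⟨hns, q, hq, hqoil, hqk⟩
          exact ⟨hns, q, List.mem_cons_of_mem _ hq, hqoil, hqk⟩
        · rintro ⟨hns, q, hq, hqoil, hqk⟩
          rcases List.mem_cons.1 hq with rfl | hq'
          · -- the head was skipped: either not oil, or its key is already in S
            exfalso
            rcases not_and_or.1 hc with h1 | h1
            · exact h1 hqoil
            · rw [not_not] at h1
              exact hns (by rw [hqk]; exact h1)
          · exact ⟨hns, q, hq', hqoil, hqk⟩

lemma pvMidAgg (comps : List (Int × PySem.Set Int)) (init : List Int) :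
    comps.foldl (fun o sc => sc.2.foldl (fun o c => pvOilAdd o c sc.1) o) init
    = (comps.flatMap (fun e => (e.2 : List Int).map (fun c => (e.1, c)))).foldl
        (fun o sc => pvOilAdd o sc.2 sc.1) init := by
  induction comps generalizing init with
  | nil => simp
  | cons e comps ih =>
      rw [List.flatMap_cons, List.foldl_append, List.foldl_cons, ih, List.foldl_map]

lemma pvPairwise_zip {α β : Type} (R : β → β → Prop) :
    ∀ (l1 : List α) (l2 : List β), l2.Pairwise R →
      (l1.zip l2).Pairwise (fun a b => R a.2 b.2) := by
  intro l1
  induction l1 with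
  | nil => intro l2 _; simp
  | cons a t ih =>
      intro l2 h
      cases l2 with
      | nil => simp
      | cons b t2 =>
          rw [List.zip_cons_cons]
          rw [List.pairwise_cons] at h ⊢
          refine ⟨?_, ih t2 h.2⟩
          intro x hx
          exact h.1 x.2 (List.of_mem_zip hx).2

lemma pvPermAux (rt : (Int × Int) → Int) (szD : Int → Int) :
    ∀ (es : List ((Int × PySem.Set Int) × (Int × Int))) (K : List (Int × Int)),
    K.Nodup →
    (∀ e ∈ es, szD (rt e.2) = e.1.1 ∧ (e.1.2 : List Int).Nodup) →
    es.Pairwise (fun a b => rt a.2 ≠ rt b.2) →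
    (∀ k, k ∈ K ↔ ∃ e ∈ es, k.1 = rt e.2 ∧ k.2 ∈ e.1.2) →
    (K.map (fun k => ((szD k.1 : Int), k.2))).Perm
      (es.flatMap (fun e => (e.1.2 : List Int).map (fun c => (e.1.1, c)))) := by
  intro es
  induction es with
  | nil =>
      intro K _ _ _ hK
      have : K = [] := List.eq_nil_iff_forall_not_mem.2 (fun k hk => by
        obtain ⟨e, he, _⟩ := (hK k).1 hk
        simp at he)
      rw [this]
      simp
  | cons e0 es ih =>
      intro K hKnd hdata hpw hK
      have hd0 := hdata e0 List.mem_cons_self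
      have hpw0 : ∀ b ∈ es, rt e0.2 ≠ rt b.2 := (List.pairwise_cons.1 hpw).1
      set p : (Int × Int) → Bool := fun k => k.1 == rt e0.2 with hp
      have hsplit := List.filter_append_perm p K
      -- block 1
      have hmemfil : ∀ k, k ∈ K.filter p ↔ k.1 = rt e0.2 ∧ k.2 ∈ e0.1.2 := by
        intro k
        rw [List.mem_filter]
        constructor
        · rintro ⟨hkK, hkp⟩
          have hk1 : k.1 = rt e0.2 := by simpa [hp] using hkp
          obtain ⟨e, he, hke1, hke2⟩ := (hK k).1 hkK
          rcases List.mem_cons.1 he with rfl | he'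
          · exact ⟨hk1, hke2⟩
          · exact absurd (hk1.symm.trans hke1) (hpw0 e he')
        · rintro ⟨h1, h2⟩
          exact ⟨(hK k).2 ⟨e0, List.mem_cons_self, h1, h2⟩, by simpa [hp] using h1⟩
      have hfilnd : (K.filter p).Nodup := hKnd.filter p
      have hinj : Function.Injective (fun c : Int => (rt e0.2, c)) :=
        fun a b h => congrArg Prod.snd h
      have hmapnd : ((e0.1.2 : List Int).map (fun c => (rt e0.2, c))).Nodup :=
        hd0.2.map hinj
      have hb1perm : (K.filter p).Perm ((e0.1.2 : List Int).map (fun c => (rt e0.2, c))) := by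
        rw [List.perm_ext_iff_of_nodup hfilnd hmapnd]
        intro k
        rw [hmemfil k, List.mem_map]
        constructor
        · rintro ⟨h1, h2⟩
          exact ⟨k.2, h2, by rw [← h1]⟩
        · rintro ⟨c, hc, rfl⟩
          exact ⟨rfl, hc⟩
      have hb1 : ((K.filter p).map (fun k => ((szD k.1 : Int), k.2))).Perm
          ((e0.1.2 : List Int).map (fun c => (e0.1.1, c))) := by
        have h1 : ((e0.1.2 : List Int).map (fun c => (rt e0.2, c))).map
            (fun k : Int × Int => ((szD k.1 : Int), k.2))
            = (e0.1.2 : List Int).map (fun c => (e0.1.1, c)) := by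
          rw [List.map_map]
          apply List.map_congr_left
          intro c _
          simp [hd0.1]
        have h2 := hb1perm.map (fun k : Int × Int => ((szD k.1 : Int), k.2))
        rwa [h1] at h2
      -- block 2
      have hb2 : ((K.filter (fun k => !p k)).map (fun k => ((szD k.1 : Int), k.2))).Perm
          (es.flatMap (fun e => (e.1.2 : List Int).map (fun c => (e.1.1, c)))) := by
        apply ih
        · exact hKnd.filter _
        · exact fun e he => hdata e (List.mem_cons_of_mem _ he)
        · exact (List.pairwise_cons.1 hpw).2
        · intro k
          rw [List.mem_filter]
          constructor
          · rintro ⟨hkK, hkp⟩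
            have hk1 : k.1 ≠ rt e0.2 := by simpa [hp] using hkp
            obtain ⟨e, he, hke1, hke2⟩ := (hK k).1 hkK
            rcases List.mem_cons.1 he with rfl | he'
            · exact absurd hke1 hk1
            · exact ⟨e, he', hke1, hke2⟩
          · rintro ⟨e, he, hke1, hke2⟩
            refine ⟨(hK k).2 ⟨e, List.mem_cons_of_mem _ he, hke1, hke2⟩, ?_⟩
            have : k.1 ≠ rt e0.2 := by
              rw [hke1]
              exact fun hh => hpw0 e he hh.symm
            simpa [hp] using this
      have h0 : (K.map (fun k => ((szD k.1 : Int), k.2))).Perm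
          ((K.filter p).map (fun k => ((szD k.1 : Int), k.2))
            ++ (K.filter (fun k => !p k)).map (fun k => ((szD k.1 : Int), k.2))) := by
        have := (hsplit.map (fun k : Int × Int => ((szD k.1 : Int), k.2))).symm
        rwa [List.map_append] at this
      refine h0.trans ?_
      rw [List.flatMap_cons]
      exact hb1.append hb2

-- ===== the mid-layer scan invariant: comps records the components, seeds their first cells =====

def pvMINV (arr : List (List Int)) (n m : Int)
    (st : List (Int × PySem.Set Int) × PySem.Set (Int × Int)) (P : List (Int × Int)) : Prop :=
  ∃ seeds : List (Int × Int),
    List.Forall₂ (fun (e : Int × PySem.Set Int) (s : Int × Int) =>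
        ∃ L : List (Int × Int), L.Nodup ∧ (∀ q, q ∈ L ↔ pvClassP arr n m s q) ∧
          e.1 = (L.length : Int) ∧ (e.2 : List Int).Nodup ∧
          (∀ c, c ∈ e.2 ↔ ∃ q ∈ L, q.2 = c)) st.1 seeds ∧
    (∀ s ∈ seeds, pvOk arr n m s) ∧
    seeds.Pairwise (fun s s' => ¬ pvReach arr n m s s') ∧
    st.2.Nodup ∧
    (∀ q, q ∈ st.2 ↔ ∃ s ∈ seeds, pvClassP arr n m s q) ∧
    (∀ p ∈ P, pvOk arr n m p → ∃ s ∈ seeds, pvClassP arr n m s p)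

lemma pvForall₂_append {α β : Type} {R : α → β → Prop} :
    ∀ {l1 : List α} {l2 : List β} {l3 : List α} {l4 : List β},
    List.Forall₂ R l1 l2 → List.Forall₂ R l3 l4 → List.Forall₂ R (l1 ++ l3) (l2 ++ l4) := by
  intro l1 l2 l3 l4 h1 h2
  induction h1 with
  | nil => simpa using h2
  | cons hr _ ih => exact List.Forall₂.cons hr ih

lemma pvMINV_step (arr : List (List Int)) (n m : Int) (p : Int × Int) (hp : pvOkB n m p)
    (st : List (Int × PySem.Set Int) × PySem.Set (Int × Int)) (P : List (Int × Int))
    (h : pvMINV arr n m st P) :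
    pvMINV arr n m (pvCellB arr n m p.1 p.2 st) (P ++ [p]) := by
  obtain ⟨seeds, hF, hOkS, hPw, hSn, hSeen, hCov⟩ := h
  have hClSeen : ∀ q ∈ st.2, ∀ w, pvStepRel arr n m q w → w ∈ st.2 := by
    intro q hq w hw
    obtain ⟨s, hs, hok, hr⟩ := (hSeen q).1 hq
    exact (hSeen w).2 ⟨s, hs, hw.1, Relation.ReflTransGen.tail hr hw⟩
  by_cases hc : pvGetCell arr p.1 p.2 ≠ 0 ∧ ¬ (p.1, p.2) ∈ st.2
  case neg =>
    simp only [pvCellB]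
    rw [if_neg hc]
    refine ⟨seeds, hF, hOkS, hPw, hSn, hSeen, ?_⟩
    intro q hq hok
    rcases List.mem_append.1 hq with hq | hq
    · exact hCov q hq hok
    · rcases List.mem_singleton.1 hq with rfl
      have hmem : (q.1, q.2) ∈ st.2 := by
        rcases not_and_or.1 hc with h1 | h1
        · exact absurd hok.2 h1
        · rw [not_not] at h1; exact h1
      exact (hSeen q).1 hmem
  case pos =>
    simp only [pvCellB]
    rw [if_pos hc]
    have hpOk : pvOk arr n m p := ⟨hp, hc.1⟩
    have hpns : (p.1, p.2) ∉ st.2 := hc.2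
    have hpns' : p ∉ st.2 := hpns
    have hadd : PySem.Set.add st.2 (p.1, p.2) = st.2 ++ [(p.1, p.2)] :=
      PySem.Set.add_of_not_mem hpns
    obtain ⟨δ, b1, b2, b3, b4, b5, b6, b7, b8⟩ :=
      pvLoopB_char arr n m [(p.1, p.2)] 0 PySem.Set.empty (PySem.Set.add st.2 (p.1, p.2))
        (by
          intro q hq; rcases List.mem_singleton.1 hq with rfl
          exact ⟨hpOk, by rw [hadd]; simp⟩)
        (by rw [hadd]; exact pvNodupSnoc st.2 (p.1, p.2) hSn hpns)
        (by simp)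
        (by simp)
        (by simp [PySem.Set.empty])
        (by simp [PySem.Set.empty])
    set LP := pvLoopB arr n m [(p.1, p.2)] 0 PySem.Set.empty
      (PySem.Set.add st.2 (p.1, p.2)) with hLP
    -- δ is exactly the rest of p's component
    have hReachB : ∀ q, q ∈ δ ↔
        (pvOk arr n m q ∧ q ∉ PySem.Set.add st.2 (p.1, p.2) ∧ pvReach arr n m p q) := by
      intro q
      constructor
      · intro hq
        obtain ⟨hqOk, hqns⟩ := b3 q hq
        have hqfin : q ∈ LP.2.2 := by rw [b2]; exact List.mem_append_right _ hq
        rcases b5 q hqfin with h | ⟨x, hx, hr⟩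
        · exact absurd h hqns
        · rcases List.mem_singleton.1 (by simpa using hx) with rfl
          exact ⟨hqOk, hqns, hr⟩
      · rintro ⟨hqOk, hqns, hreach⟩
        have hqfin := pvReach_ind arr n m (· ∈ LP.2.2) p q
          (by rw [b2]; exact List.mem_append_left _ (by rw [hadd]; simp)) hp
          (by
            intro x hxB hxmem w hstep
            rw [b2] at hxmem
            rcases List.mem_append.1 hxmem with hx | hx
            · rw [hadd] at hx
              rcases List.mem_append.1 hx with hx | hx
              · have := hClSeen x hx w hstep
                rw [b2, hadd]
                exact List.mem_append_left _ (List.mem_append_left _ this)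
              · rcases List.mem_singleton.1 hx with hx2
                exact b6 x (by rw [b1, hx2]; simp) w hstep
            · exact b6 x (by rw [b1]; exact List.mem_append_right _ hx) w hstep)
          hreach
        rw [b2] at hqfin
        rcases List.mem_append.1 hqfin with h | h
        · exact absurd h hqns
        · exact h
    set L : List (Int × Int) := (p.1, p.2) :: δ with hLdef
    have hLiff : ∀ q, q ∈ L ↔ pvClassP arr n m p q := by
      intro q
      rw [hLdef]
      constructor
      · intro hq
        rcases List.mem_cons.1 hq with rfl | hq'
        · exact ⟨hpOk, Relation.ReflTransGen.refl⟩
        · obtain ⟨h1, _, h3⟩ := (hReachB q).1 hq'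
          exact ⟨h1, h3⟩
      · rintro ⟨hqOk, hreach⟩
        by_cases hqs : q ∈ PySem.Set.add st.2 (p.1, p.2)
        · rw [hadd] at hqs
          rcases List.mem_append.1 hqs with hq1 | hq1
          · exfalso
            obtain ⟨s, hs, hsok, hsr⟩ := (hSeen q).1 hq1
            have hqp : pvReach arr n m q p := pvReach_symm arr n m p q hpOk hreach
            have : (p.1, p.2) ∈ st.2 :=
              (hSeen p).2 ⟨s, hs, hpOk, Relation.ReflTransGen.trans hsr hqp⟩
            exact hpns this
          · rcases List.mem_singleton.1 hq1 with rfl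
            exact List.mem_cons_self
        · exact List.mem_cons_of_mem _ ((hReachB q).2 ⟨hqOk, hqs, hreach⟩)
    have hδnd : δ.Nodup := by
      have := b4
      rw [List.nodup_append] at this
      exact this.2.1
    have hLnd : L.Nodup := by
      rw [hLdef, List.nodup_cons]
      refine ⟨?_, hδnd⟩
      intro hpm
      exact ((hReachB (p.1, p.2)).1 hpm).2.1 (by rw [hadd]; simp)
    have hlenL : LP.1.length = L.length := by
      rw [b1, hLdef]; simp
    refine ⟨seeds ++ [p], ?_, ?_, ?_, ?_, ?_, ?_⟩
    · -- Forall₂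
      refine pvForall₂_append hF (List.Forall₂.cons ?_ List.Forall₂.nil)
      refine ⟨L, hLnd, hLiff, by rw [hlenL], b8, ?_⟩
      intro c
      rw [b7 c, b1, hLdef]
      constructor
      · rintro ⟨q, hq, rfl⟩
        rcases List.mem_append.1 hq with hq | hq
        · have hq2 := List.mem_singleton.1 hq
          exact ⟨q, by rw [hq2]; exact List.mem_cons_self, rfl⟩
        · exact ⟨q, List.mem_cons_of_mem _ hq, rfl⟩
      · rintro ⟨q, hq, rfl⟩
        rcases List.mem_cons.1 hq with hq2 | hq'
        · exact ⟨q, List.mem_append_left _ (by rw [hq2]; exact List.mem_singleton.2 rfl), rfl⟩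
        · exact ⟨q, List.mem_append_right _ hq', rfl⟩
    · intro s hs
      rcases List.mem_append.1 hs with hs | hs
      · exact hOkS s hs
      · rcases List.mem_singleton.1 hs with rfl
        exact hpOk
    · rw [List.pairwise_append]
      refine ⟨hPw, List.pairwise_singleton _ _, ?_⟩
      intro s hs s' hs'
      rcases List.mem_singleton.1 hs' with rfl
      intro hr
      exact hpns ((hSeen (s'.1, s'.2)).2 ⟨s, hs, hpOk, hr⟩)
    · rw [b2]; exact b4
    · intro q
      rw [b2, List.mem_append, hadd]
      constructor
      · rintro (hq | hq)
        · rcases List.mem_append.1 hq with hq | hq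
          · obtain ⟨s, hs, hcl⟩ := (hSeen q).1 hq
            exact ⟨s, List.mem_append_left _ hs, hcl⟩
          · have hq2 := List.mem_singleton.1 hq
            exact ⟨p, List.mem_append_right _ (List.mem_singleton.2 rfl),
              (hLiff q).1 (by rw [hq2]; exact List.mem_cons_self)⟩
        · exact ⟨p, List.mem_append_right _ (List.mem_singleton.2 rfl),
            (hLiff q).1 (List.mem_cons_of_mem _ hq)⟩
      · rintro ⟨s, hs, hcl⟩
        rcases List.mem_append.1 hs with hs | hs
        · exact Or.inl (List.mem_append_left _ ((hSeen q).2 ⟨s, hs, hcl⟩))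
        · rcases List.mem_singleton.1 hs with rfl
          have := (hLiff q).2 hcl
          rcases List.mem_cons.1 this with rfl | hq'
          · exact Or.inl (List.mem_append_right _ (List.mem_singleton.2 rfl))
          · exact Or.inr hq'
    · intro q hq hqok
      rcases List.mem_append.1 hq with hq | hq
      · obtain ⟨s, hs, hcl⟩ := hCov q hq hqok
        exact ⟨s, List.mem_append_left _ hs, hcl⟩
      · rcases List.mem_singleton.1 hq with rfl
        exact ⟨q, List.mem_append_right _ (List.mem_singleton.2 rfl),
          ⟨hqok, Relation.ReflTransGen.refl⟩⟩

lemma pvMINV_fold (arr : List (List Int)) (n m : Int) :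
    ∀ (L : List (Int × Int)) (st : List (Int × PySem.Set Int) × PySem.Set (Int × Int))
      (P : List (Int × Int)),
    pvMINV arr n m st P → (∀ p ∈ L, pvOkB n m p) →
    pvMINV arr n m (L.foldl (fun st p => pvCellB arr n m p.1 p.2 st) st) (P ++ L) := by
  intro L
  induction L with
  | nil => intro st P h _; simpa using h
  | cons p L ih =>
      intro st P h hL
      rw [List.foldl_cons, show P ++ p :: L = (P ++ [p]) ++ L by simp]
      exact ih _ _ (pvMINV_step arr n m p (hL p List.mem_cons_self) st P h)
        (fun q hq => hL q (List.mem_cons_of_mem _ hq))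

-- ===== the main equality of the second half =====

lemma pvCountClass (arr : List (List Int)) (n m : Int) (comp : List Int)
    (hUF : pvUF (n * m) (pvAllE arr n m) comp)
    (s : Int × Int) (hs : pvOk arr n m s) (L : List (Int × Int)) (hLnd : L.Nodup)
    (hLiff : ∀ q, q ∈ L ↔ pvClassP arr n m s q) :
    (((pvCells n m).filter (fun p => decide (pvGetCell arr p.1 p.2 ≠ 0))).map
      (fun p => pvCf comp (pvIdx m p))).count (pvCf comp (pvIdx m s)) = L.length := by
  rw [List.count_eq_countP, List.countP_map, List.countP_filter, List.countP_eq_length_filter]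
  apply List.Perm.length_eq
  refine (List.perm_ext_iff_of_nodup (List.Nodup.filter _ (pvCells_nodup n m)) hLnd).2 ?_
  intro q
  rw [List.mem_filter, pvMem_cells, hLiff]
  unfold pvClassP
  constructor
  · rintro ⟨hqB, hcond⟩
    have hcond' : pvCf comp (pvIdx m q) = pvCf comp (pvIdx m s) ∧
        pvGetCell arr q.1 q.2 ≠ 0 := by simpa using hcond
    have hqok : pvOk arr n m q := ⟨hqB, hcond'.2⟩
    have := (pvRootChar arr n m comp hUF q s hqok hs).1 hcond'.1
    exact ⟨hqok, pvReach_symm arr n m q s hqok this⟩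
  · rintro ⟨hqok, hreach⟩
    refine ⟨hqok.1, ?_⟩
    have hcf : pvCf comp (pvIdx m q) = pvCf comp (pvIdx m s) :=
      (pvRootChar arr n m comp hUF q s hqok hs).2 (pvReach_symm arr n m s q hs hreach)
    simpa using ⟨hcf, hqok.2⟩
lemma pvMainCore (arr : List (List Int)) (n m : Int) (hn0 : 0 ≤ n) (hm0 : 0 ≤ m) :
    (PySem.List.max?
      (((PySem.List.pyRange 0 n 1).foldl
          (fun st si => (PySem.List.pyRange 0 m 1).foldl
            (fun st sj => pvCellB arr n m si sj st) st)
          ([], PySem.Set.empty)).1.foldl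
        (fun o sc => sc.2.foldl (fun o c => pvOilAdd o c sc.1) o)
        (PySem.List.pyRepeat [(0 : Int)] (m + 1)))
      (fun x => x)).getD 0
    = (PySem.List.max?
        ((PySem.List.pyRange 0 n 1).foldl
          (fun st i => (PySem.List.pyRange 0 m 1).foldl
            (fun st j => pvAccStep arr m
              ((PySem.List.pyRange 0 n 1).foldl (fun comp i =>
                (PySem.List.pyRange 0 m 1).foldl (fun comp j => pvUStep arr n m comp i j) comp)
                ((PySem.List.pyRange 0 n 1).flatMap
                  (fun i => (PySem.List.pyRange 0 m 1).map (fun j => i * m + j))))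
              ((PySem.List.pyRange 0 n 1).foldl (fun d i =>
                (PySem.List.pyRange 0 m 1).foldl (fun d j => pvSizeStep arr m
                  ((PySem.List.pyRange 0 n 1).foldl (fun comp i =>
                    (PySem.List.pyRange 0 m 1).foldl (fun comp j => pvUStep arr n m comp i j) comp)
                    ((PySem.List.pyRange 0 n 1).flatMap
                      (fun i => (PySem.List.pyRange 0 m 1).map (fun j => i * m + j))))
                  d i j) d) PySem.Dict.empty)
              st i j) st)
          (PySem.List.pyRepeat [(0 : Int)] (m + 1), (PySem.Set.empty : PySem.Set (Int × Int)))).1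
        (fun x => x)).getD 0 := by
  have hM : (PySem.List.pyRange 0 n 1).foldl
      (fun st si => (PySem.List.pyRange 0 m 1).foldl (fun st sj => pvCellB arr n m si sj st) st)
      (([], PySem.Set.empty) : List (Int × PySem.Set Int) × PySem.Set (Int × Int))
      = (pvCells n m).foldl (fun st p => pvCellB arr n m p.1 p.2 st) ([], PySem.Set.empty) :=
    pvFoldCells (g := fun st i j => pvCellB arr n m i j st) _ n m
  have hCcomp : (PySem.List.pyRange 0 n 1).foldl (fun comp i =>
      (PySem.List.pyRange 0 m 1).foldl (fun comp j => pvUStep arr n m comp i j) comp)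
      ((PySem.List.pyRange 0 n 1).flatMap
        (fun i => (PySem.List.pyRange 0 m 1).map (fun j => i * m + j)))
      = (pvCells n m).foldl (fun c p => pvUStep arr n m c p.1 p.2)
        ((PySem.List.pyRange 0 n 1).flatMap
          (fun i => (PySem.List.pyRange 0 m 1).map (fun j => i * m + j))) :=
    pvFoldCells (g := fun c i j => pvUStep arr n m c i j) _ n m
  rw [hM, hCcomp]
  set comp : List Int := (pvCells n m).foldl (fun c p => pvUStep arr n m c p.1 p.2)
    ((PySem.List.pyRange 0 n 1).flatMap
      (fun i => (PySem.List.pyRange 0 m 1).map (fun j => i * m + j))) with hcomp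
  set size : PySem.Dict Int Int := (PySem.List.pyRange 0 n 1).foldl (fun d i =>
      (PySem.List.pyRange 0 m 1).foldl (fun d j => pvSizeStep arr m comp d i j) d)
    PySem.Dict.empty with hsize
  have hA : (PySem.List.pyRange 0 n 1).foldl
      (fun st i => (PySem.List.pyRange 0 m 1).foldl
        (fun st j => pvAccStep arr m comp size st i j) st)
      (PySem.List.pyRepeat [(0 : Int)] (m + 1), (PySem.Set.empty : PySem.Set (Int × Int)))
      = (pvCells n m).foldl (fun st p => pvAccStep arr m comp size st p.1 p.2)
        (PySem.List.pyRepeat [(0 : Int)] (m + 1), PySem.Set.empty) :=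
    pvFoldCells (g := fun st i j => pvAccStep arr m comp size st i j) _ n m
  rw [hA]
  set stM := (pvCells n m).foldl (fun st p => pvCellB arr n m p.1 p.2 st)
    ([], PySem.Set.empty) with hstM
  -- the union-find invariant for the final component array
  have hUF : pvUF (n * m) (pvAllE arr n m) comp := by
    rw [hcomp]
    have h0 : pvUF (n * m) []
        ((PySem.List.pyRange 0 n 1).flatMap
          (fun i => (PySem.List.pyRange 0 m 1).map (fun j => i * m + j))) := by
      obtain ⟨hl, hcf⟩ := pvComp0_spec n m hn0 hm0
      refine ⟨hl, ?_, ?_⟩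
      · intro x hx0 hxN
        rw [hcf x hx0 hxN]; exact ⟨hx0, hxN⟩
      · intro x y hx0 hxN hy0 hyN
        rw [hcf x hx0 hxN, hcf y hy0 hyN, pvEqv_nil]
    have hscan := pvUF_scan arr n m (pvCells n m) _ [] h0
      (fun p hp => (pvMem_cells n m p).1 hp)
    simpa [pvAllE] using hscan
  -- the component census of the mid layer
  have hMI : pvMINV arr n m stM (pvCells n m) := by
    rw [hstM]
    have h0 : pvMINV arr n m ([], PySem.Set.empty) [] := by
      refine ⟨[], List.Forall₂.nil, by simp, by simp, by simp [PySem.Set.empty], ?_, by simp⟩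
      intro q; simp [PySem.Set.empty]
    have := pvMINV_fold arr n m (pvCells n m) _ [] h0
      (fun p hp => (pvMem_cells n m p).1 hp)
    simpa using this
  obtain ⟨seeds, hF, hOkS, hPw, hSn, hSeen, hCov⟩ := hMI
  obtain ⟨K, a1, a2, a3, a4⟩ := pvAcc_spec arr m comp size (pvCells n m)
      (PySem.List.pyRepeat [(0 : Int)] (m + 1)) PySem.Set.empty (by simp [PySem.Set.empty])
  rw [a3]
  -- root facts
  have hroot : ∀ s, pvOk arr n m s → ∀ q, pvOk arr n m q →
      (pvCf comp (pvIdx m q) = pvCf comp (pvIdx m s) ↔ pvReach arr n m s q) := by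
    intro s hsok q hqok
    rw [pvRootChar arr n m comp hUF q s hqok hsok]
    exact ⟨pvReach_symm arr n m q s hqok, pvReach_symm arr n m s q hsok⟩
  have hlen : stM.1.length = seeds.length := hF.length_eq
  obtain ⟨-, hzipR⟩ := List.forall₂_iff_zip.1 hF
  -- the per-entry data for the permutation lemma
  have hSz : ∀ e ∈ stM.1.zip seeds,
      size.getD (pvCf comp (pvIdx m e.2)) 0 = e.1.1 ∧ (e.1.2 : List Int).Nodup := by
    intro e he
    obtain ⟨L, hLnd, hLiff, hLen, hCnd, hCiff⟩ := hzipR he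
    have hsok := hOkS e.2 (List.of_mem_zip he).2
    refine ⟨?_, hCnd⟩
    rw [hsize, pvSizeChar arr n m comp (pvCf comp (pvIdx m e.2)),
      pvCountClass arr n m comp hUF e.2 hsok L hLnd hLiff]
    exact hLen.symm
  have hpwzip : (stM.1.zip seeds).Pairwise
      (fun a b => pvCf comp (pvIdx m a.2) ≠ pvCf comp (pvIdx m b.2)) := by
    refine pvPairwise_zip (fun a b => pvCf comp (pvIdx m a) ≠ pvCf comp (pvIdx m b)) _ _ ?_
    refine List.Pairwise.imp_of_mem ?_ hPw
    intro a b ha hb hnr heq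
    exact hnr ((hroot a (hOkS a ha) b (hOkS b hb)).1 heq.symm)
  have hKnd : K.Nodup := by simpa [PySem.Set.empty] using a2
  have hKiff : ∀ k, k ∈ K ↔
      ∃ e ∈ stM.1.zip seeds, k.1 = pvCf comp (pvIdx m e.2) ∧ k.2 ∈ e.1.2 := by
    intro k
    rw [a4 k]
    constructor
    · rintro ⟨-, p, hpc, hpoil, rfl⟩
      have hpB := (pvMem_cells n m p).1 hpc
      have hpok : pvOk arr n m p := ⟨hpB, hpoil⟩
      obtain ⟨s, hsmem, hcl⟩ := hCov p hpc hpok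
      obtain ⟨i, hi, hsi⟩ := List.mem_iff_getElem.1 hsmem
      have hi1 : i < stM.1.length := by rw [hlen]; exact hi
      have hzlt : i < (stM.1.zip seeds).length := by
        rw [List.length_zip]; omega
      have hzv : (stM.1.zip seeds)[i]'hzlt = (stM.1[i]'hi1, seeds[i]'hi) := List.getElem_zip
      have hmemzip : (stM.1[i]'hi1, seeds[i]'hi) ∈ stM.1.zip seeds := by
        rw [← hzv]; exact List.getElem_mem hzlt
      obtain ⟨L, hLnd, hLiff, hLen, hCnd, hCiff⟩ := hzipR hmemzip
      have hsok : pvOk arr n m s := hOkS s hsmem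
      refine ⟨(stM.1[i]'hi1, seeds[i]'hi), hmemzip, ?_, ?_⟩
      · show pvCf comp (pvIdx m p) = pvCf comp (pvIdx m (seeds[i]'hi))
        rw [hsi]
        exact (hroot s hsok p hpok).2 hcl.2
      · show p.2 ∈ (stM.1[i]'hi1, seeds[i]'hi).1.2
        have hpL : p ∈ L := (hLiff p).2 (by rw [hsi]; exact hcl)
        exact (hCiff p.2).2 ⟨p, hpL, rfl⟩
    · rintro ⟨e, he, hk1, hk2⟩
      obtain ⟨L, hLnd, hLiff, hLen, hCnd, hCiff⟩ := hzipR he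
      have hsok := hOkS e.2 (List.of_mem_zip he).2
      obtain ⟨q, hqL, hq2⟩ := (hCiff k.2).1 hk2
      have hqcl := (hLiff q).1 hqL
      refine ⟨by simp [PySem.Set.empty], q, (pvMem_cells n m q).2 hqcl.1.1, hqcl.1.2, ?_⟩
      have h1 : k.1 = pvCf comp (pvIdx m q) := by
        rw [hk1]
        exact ((hroot e.2 hsok q hqcl.1).2 hqcl.2).symm
      exact Prod.ext h1 hq2.symm
  have hperm := pvPermAux (fun s => pvCf comp (pvIdx m s)) (fun r => size.getD r 0)
      (stM.1.zip seeds) K hKnd hSz hpwzip hKiff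
  -- assemble the two oil arrays
  rw [pvMidAgg]
  have hKfold : K.foldl (fun o k => pvOilAdd o k.2 (size.getD k.1 0))
      (PySem.List.pyRepeat [(0 : Int)] (m + 1))
      = (K.map (fun k => (size.getD k.1 0, k.2))).foldl
        (fun o sc => pvOilAdd o sc.2 sc.1) (PySem.List.pyRepeat [(0 : Int)] (m + 1)) := by
    rw [List.foldl_map]
  rw [hKfold]
  have hflat : (stM.1.zip seeds).flatMap
      (fun e => (e.1.2 : List Int).map (fun c => (e.1.1, c)))
      = stM.1.flatMap (fun e => (e.2 : List Int).map (fun c => (e.1, c))) := by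
    conv_rhs => rw [← List.map_fst_zip (le_of_eq hlen)]
    rw [List.flatMap_map]
  rw [hflat] at hperm
  haveI : RightCommutative (fun (o : List Int) (sc : Int × Int) => pvOilAdd o sc.2 sc.1) :=
    ⟨fun a b c => pvOilAdd_comm a b.2 b.1 c.2 c.1⟩
  rw [hperm.foldl_eq (PySem.List.pyRepeat [(0 : Int)] (m + 1))]

lemma pvMainNew (arr : List (List Int)) : pvMidSol arr = solution_alt arr := by
  unfold pvMidSol solution_alt
  exact pvMainCore arr (PySem.List.len arr)
    (PySem.List.len ((PySem.List.pyGet? arr 0).getD []))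
    (by rw [PySem.List.len_eq]; exact_mod_cast Nat.zero_le _)
    (by rw [PySem.List.len_eq]; exact_mod_cast Nat.zero_le _)

-- ===== VERDICT (by name: the statement is the Claim_ definition above) =====
theorem solution_spec : Claim_equal_solution := by
  intro arr _ _
  unfold Spec_solution
  rw [pvMainMid, pvMainNew]
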